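-- pv_equiv track=rewrite | github.com/haolunc/ARC-RL | reference_solutions/solutions/22208ba4.py | transform
-- ===== SOURCE A (Python) =====
-- def transform(grid):
--     from collections import deque, Counter
--
--     h, w = len(grid), len(grid[0])
--
--     flat = [c for row in grid for c in row]
--     bg = Counter(flat).most_common(1)[0][0]
--
--     visited = [[False] * w for _ in range(h)]
--     comps_by_colour = {}
--
--     for r in range(h):
--         for c in range(w):
--             if visited[r][c]:
--                 continue
--             colour = grid[r][c]
--             visited[r][c] = True
--
--             if colour == bg:
--                 continue
--             q = deque([(r, c)])
--             cells = [(r, c)]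
--             while q:
--                 cr, cc = q.popleft()
--                 for dr, dc in ((1,0),(-1,0),(0,1),(0,-1)):
--                     nr, nc = cr+dr, cc+dc
--                     if 0 <= nr < h and 0 <= nc < w and not visited[nr][nc] and grid[nr][nc]==colour:
--                         visited[nr][nc] = True
--                         q.append((nr,nc))
--                         cells.append((nr,nc))
--             comps_by_colour.setdefault(colour, []).append(cells)
--
--     out = [[bg]*w for _ in range(h)]
--
--     for colour, comps in comps_by_colour.items():
--         if len(comps) <= 1:
--             for comp in comps:
--                 for r,c in comp:
--                     out[r][c] = colour
--             continue
--
--         for comp in comps: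
--
--             min_r = min(r for r,_ in comp)
--             max_r = max(r for r,_ in comp)
--             min_c = min(c for _,c in comp)
--             max_c = max(c for _,c in comp)
--             height = max_r - min_r + 1
--             width  = max_c - min_c + 1
--
--             dr = height if min_r == 0 else (-height if max_r == h-1 else 0)
--             dc = width  if min_c == 0 else (-width if max_c == w-1 else 0)
--
--             for r,c in comp:
--                 nr, nc = r + dr, c + dc
--                 out[nr][nc] = colour
--
--     return out
-- ===== SOURCE B (Python) =====
-- def transform(grid):
--     from collections import Counter
--
--     h, w = len(grid), len(grid[0])
--
--     flat = [c for row in grid for c in row]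
--     bg = Counter(flat).most_common(1)[0][0]
--
--     n = h * w
--
--     def colour_at(i):
--         return grid[i // w][i % w]
--
--     def nbrs(i):
--         r, c = i // w, i % w
--         cand = []
--         if r > 0:
--             cand.append(i - w)
--         if r < h - 1:
--             cand.append(i + w)
--         if c > 0:
--             cand.append(i - 1)
--         if c < w - 1:
--             cand.append(i + 1)
--         return [j for j in cand if colour_at(j) == colour_at(i)]
--
--     # minimum-label propagation: iterate "label := min of own and same-colour
--     # neighbours' labels" to a fixpoint; equal final labels <=> same component
--     lab = list(range(n))
--     changed = True
--     while changed:
--         new = [min([lab[i]] + [lab[j] for j in nbrs(i)]) for i in range(n)]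
--         changed = new != lab
--         lab = new
--
--     groups = {}
--     for i in range(n):
--         if colour_at(i) == bg:
--             continue
--         if lab[i] in groups:
--             groups[lab[i]].append((i // w, i % w))
--         else:
--             groups[lab[i]] = [(i // w, i % w)]
--
--     comps_by_colour = {}
--     for root, cells in groups.items():
--         comps_by_colour.setdefault(colour_at(root), []).append(cells)
--
--     out = [[bg]*w for _ in range(h)]
--
--     for colour, comps in comps_by_colour.items():
--         if len(comps) <= 1:
--             for comp in comps:
--                 for r,c in comp:
--                     out[r][c] = colour
--             continue
--
--         for comp in comps:
--
--             min_r = min(r for r,_ in comp)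
--             max_r = max(r for r,_ in comp)
--             min_c = min(c for _,c in comp)
--             max_c = max(c for _,c in comp)
--             height = max_r - min_r + 1
--             width  = max_c - min_c + 1
--
--             dr = height if min_r == 0 else (-height if max_r == h-1 else 0)
--             dc = width  if min_c == 0 else (-width if max_c == w-1 else 0)
--
--             for r,c in comp:
--                 nr, nc = r + dr, c + dc
--                 out[nr][nc] = colour
--
--     return out
-- ===== Notes on version B (the rewrite author's own statement) =====
-- stated objective: alternative
-- what changed: Replaces the scan-time BFS flood fill (shared visited matrix, deque per component, components collected while scanning) by global minimum-label propagation over flattened cell indices iterated to a fixpoint, after which cells are grouped by their final label and bucketed by colour; background choice and the shift/render phase are unchanged.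
import Mathlib
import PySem

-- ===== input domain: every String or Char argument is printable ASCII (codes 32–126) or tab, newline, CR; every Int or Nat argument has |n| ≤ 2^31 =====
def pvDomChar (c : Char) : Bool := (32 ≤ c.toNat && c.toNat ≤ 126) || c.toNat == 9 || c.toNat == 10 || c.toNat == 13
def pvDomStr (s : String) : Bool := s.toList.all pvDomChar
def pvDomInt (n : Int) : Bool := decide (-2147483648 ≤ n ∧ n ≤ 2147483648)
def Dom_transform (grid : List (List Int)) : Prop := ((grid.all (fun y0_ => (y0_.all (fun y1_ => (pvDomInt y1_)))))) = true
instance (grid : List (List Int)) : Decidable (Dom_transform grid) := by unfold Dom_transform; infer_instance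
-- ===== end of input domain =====

-- B replaces A's scan-time BFS flood fill by minimum-label propagation to a fixpoint over
-- flattened indices, then groups by final label; same background choice and render phase
-- (objective: alternative — same exact behaviour, including the in-place/shift rendering).

-- ===== PORT A =====
-- helpers shared by both ports: they port Python lines that are VERBATIM IDENTICAL in Source A
-- and Source B (flat/bg computation and the final rendering loop).

-- grid[r][c] as a total read (every use below is guarded in bounds by the same tests Python makes)
def pvCell (grid : List (List Int)) (r c : Int) : Int :=
  PySem.List.pyGetD (PySem.List.pyGetD grid r []) c 0

-- flat = [c for row in grid for c in row]
def pvFlat (grid : List (List Int)) : List Int := grid.flatMap (fun row => row)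

-- Counter(flat).most_common(1)[0][0]: first key (counter insertion order) with maximal count;
-- 0 on an empty flat, where Python raises IndexError (excluded by Pre_)
def pvBg (grid : List (List Int)) : Int :=
  match (PySem.Dict.counter (pvFlat grid)).items with
  | [] => 0
  | p :: rest => (rest.foldl (fun best q => if best.2 < q.2 then q else best) p).1

-- min(...) / max(...) of a nonempty list of ints (0 on [], unreachable: Python would raise)
def pvMinL (l : List Int) : Int := match l with | [] => 0 | x :: xs => xs.foldl min x
def pvMaxL (l : List Int) : Int := match l with | [] => 0 | x :: xs => xs.foldl max x

-- out[r][c] = v with Python index semantics: a negative in-range index wraps; an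
-- out-of-range write raises in Python (excluded by Pre_) and is a no-op here
def pvWrite (out : List (List Int)) (r c v : Int) : List (List Int) :=
  PySem.List.pySetD out r (PySem.List.pySetD (PySem.List.pyGetD out r []) c v)

-- the (dr, dc) a multi-component colour's component is shifted by
def pvShift (h w : Int) (comp : List (Int × Int)) : Int × Int :=
  let min_r := pvMinL (comp.map Prod.fst)
  let max_r := pvMaxL (comp.map Prod.fst)
  let min_c := pvMinL (comp.map Prod.snd)
  let max_c := pvMaxL (comp.map Prod.snd)
  let height := max_r - min_r + 1
  let width := max_c - min_c + 1
  ((if min_r = 0 then height else if max_r = h - 1 then -height else 0),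
   (if min_c = 0 then width else if max_c = w - 1 then -width else 0))

-- the final 'out = [[bg]*w ...]; for colour, comps in comps_by_colour.items(): ...' loop
def pvRender (h w bg : Int) (cbc : PySem.Dict Int (List (List (Int × Int)))) : List (List Int) :=
  let out0 := List.replicate h.toNat (List.replicate w.toNat bg)
  cbc.items.foldl (fun out e =>
    if e.2.length ≤ 1 then
      e.2.foldl (fun o comp => comp.foldl (fun o p => pvWrite o p.1 p.2 e.1) o) out
    else
      e.2.foldl (fun o comp =>
        let s := pvShift h w comp
        comp.foldl (fun o p => pvWrite o (p.1 + s.1) (p.2 + s.2) e.1) o) out) out0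

-- A-only helpers: the visited matrix and the BFS while-loop
def pvVis (vis : List (List Bool)) (r c : Int) : Bool :=
  PySem.List.pyGetD (PySem.List.pyGetD vis r []) c false

def pvMark (vis : List (List Bool)) (r c : Int) : List (List Bool) :=
  PySem.List.pySetD vis r (PySem.List.pySetD (PySem.List.pyGetD vis r []) c true)

-- 'while q: cr, cc = q.popleft(); for dr, dc in ...': fuel bounds the iteration count
-- (2*h*w+1 is shown sufficient in the proofs; the loop itself is transcribed verbatim)
def pvBfs (grid : List (List Int)) (h w colour : Int) :
    Nat → List (Int × Int) → List (List Bool) → List (Int × Int) →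
    List (List Bool) × List (Int × Int)
  | 0, _, vis, cells => (vis, cells)
  | _ + 1, [], vis, cells => (vis, cells)
  | fuel + 1, cq :: q, vis, cells =>
    let st := [((1 : Int), (0 : Int)), (-1, 0), (0, 1), (0, -1)].foldl
      (fun (s : List (List Bool) × List (Int × Int) × List (Int × Int)) d =>
        if 0 ≤ cq.1 + d.1 ∧ cq.1 + d.1 < h ∧ 0 ≤ cq.2 + d.2 ∧ cq.2 + d.2 < w ∧
            pvVis s.1 (cq.1 + d.1) (cq.2 + d.2) = false ∧
            pvCell grid (cq.1 + d.1) (cq.2 + d.2) = colour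
        then (pvMark s.1 (cq.1 + d.1) (cq.2 + d.2),
              s.2.1 ++ [(cq.1 + d.1, cq.2 + d.2)], s.2.2 ++ [(cq.1 + d.1, cq.2 + d.2)])
        else s)
      (vis, q, cells)
    pvBfs grid h w colour fuel st.2.1 st.1 st.2.2

-- the body of A's scan over (r, c)
def pvScanStep (grid : List (List Int)) (h w bg : Int)
    (st : List (List Bool) × PySem.Dict Int (List (List (Int × Int)))) (p : Int × Int) :
    List (List Bool) × PySem.Dict Int (List (List (Int × Int))) :=
  if pvVis st.1 p.1 p.2 then st
  else
    let colour := pvCell grid p.1 p.2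
    let vis := pvMark st.1 p.1 p.2
    if colour = bg then (vis, st.2)
    else
      let r := pvBfs grid h w colour (2 * h.toNat * w.toNat + 1) [p] vis [p]
      (r.1, st.2.modify colour [] (· ++ [r.2]))

def transform (grid : List (List Int)) : List (List Int) :=
  let h : Int := grid.length
  let w : Int := (grid.headD []).length
  let bg := pvBg grid
  let st := (PySem.List.pyRange 0 h 1).foldl
    (fun st r => (PySem.List.pyRange 0 w 1).foldl
      (fun st c => pvScanStep grid h w bg st (r, c)) st)
    (List.replicate h.toNat (List.replicate w.toNat false), PySem.Dict.empty)
  pvRender h w bg st.2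

-- ===== PORT B =====
-- colour_at(i) = grid[i // w][i % w]
def pvColAt (grid : List (List Int)) (w i : Int) : Int :=
  pvCell grid (PySem.Int.floordiv i w) (PySem.Int.mod i w)

-- nbrs(i): candidate up/down/left/right indices, kept when the colour matches
def pvNbrs (grid : List (List Int)) (h w i : Int) : List Int :=
  let r := PySem.Int.floordiv i w
  let c := PySem.Int.mod i w
  let cand := (if 0 < r then [i - w] else []) ++ (if r < h - 1 then [i + w] else []) ++
      (if 0 < c then [i - 1] else []) ++ (if c < w - 1 then [i + 1] else [])
  cand.filter (fun j => pvColAt grid w j = pvColAt grid w i)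

-- lab[i] (indices produced by the algorithm are always in range)
def pvLab (lab : List Int) (i : Int) : Int := PySem.List.pyGetD lab i 0

-- one propagation pass: new = [min([lab[i]] + [lab[j] for j in nbrs(i)]) for i in range(n)]
def pvPass (grid : List (List Int)) (h w n : Int) (lab : List Int) : List Int :=
  (PySem.List.pyRange 0 n 1).map
    (fun i => pvMinL (pvLab lab i :: (pvNbrs grid h w i).map (pvLab lab)))

-- 'while changed:' — fuel bounds the rounds (n*n+1 is shown sufficient in the proofs)
def pvIter (grid : List (List Int)) (h w n : Int) : Nat → List Int → List Int
  | 0, lab => lab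
  | fuel + 1, lab =>
    let new := pvPass grid h w n lab
    if new = lab then lab else pvIter grid h w n fuel new

def pvLabels (grid : List (List Int)) (h w n : Int) : List Int :=
  pvIter grid h w n (n.toNat * n.toNat + 1) (PySem.List.pyRange 0 n 1)

def transform_alt (grid : List (List Int)) : List (List Int) :=
  let h : Int := grid.length
  let w : Int := (grid.headD []).length
  let bg := pvBg grid
  let n := h * w
  let lab := pvLabels grid h w n
  let groups := (PySem.List.pyRange 0 n 1).foldl
    (fun (g : PySem.Dict Int (List (Int × Int))) i =>
      if pvColAt grid w i = bg then g
      else g.modify (pvLab lab i) [] (· ++ [(PySem.Int.floordiv i w, PySem.Int.mod i w)]))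
    PySem.Dict.empty
  let cbc := groups.items.foldl
    (fun (d : PySem.Dict Int (List (List (Int × Int)))) e =>
      d.modify (pvColAt grid w e.1) [] (· ++ [e.2]))
    PySem.Dict.empty
  pvRender h w bg cbc

-- ===== PRECONDITION & SPEC =====
-- Pre_-only helpers (independent of both ports): enumerate the non-background components by
-- plain worklist closure, to state exactly where every Python write lands in index range.
def pvGrow (grid : List (List Int)) (h w : Int) (cur : List (Int × Int)) : List (Int × Int) :=
  cur.foldl (fun acc p =>
    [(p.1 - 1, p.2), (p.1 + 1, p.2), (p.1, p.2 - 1), (p.1, p.2 + 1)].foldl (fun acc q =>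
      if 0 ≤ q.1 ∧ q.1 < h ∧ 0 ≤ q.2 ∧ q.2 < w ∧
          pvCell grid q.1 q.2 = pvCell grid p.1 p.2 ∧ q ∉ acc
      then acc ++ [q] else acc) acc) cur

def pvReach (grid : List (List Int)) (h w : Int) (p : Int × Int) : List (Int × Int) :=
  (List.range (h.toNat * w.toNat)).foldl (fun cur _ => pvGrow grid h w cur) [p]

def pvCompsPre (grid : List (List Int)) (h w : Int) : List (Int × List (Int × Int)) :=
  ((PySem.List.pyRange 0 h 1).flatMap
    (fun r => (PySem.List.pyRange 0 w 1).map (fun c => (r, c)))).foldl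
    (fun acc p =>
      if pvCell grid p.1 p.2 = pvBg grid then acc
      else if acc.any (fun e => p ∈ e.2) then acc
      else acc ++ [(pvCell grid p.1 p.2, pvReach grid h w p)]) []

def pvSafe (grid : List (List Int)) : Bool :=
  let h : Int := grid.length
  let w : Int := ((grid.headD []).length : Int)
  let comps := pvCompsPre grid h w
  comps.all (fun e =>
    (comps.countP (fun e' => e'.1 = e.1) ≤ 1) ||
    (let min_r := pvMinL (e.2.map Prod.fst)
     let max_r := pvMaxL (e.2.map Prod.fst)
     let min_c := pvMinL (e.2.map Prod.snd)
     let max_c := pvMaxL (e.2.map Prod.snd)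
     let dr := if min_r = 0 then max_r - min_r + 1
               else if max_r = h - 1 then -(max_r - min_r + 1) else 0
     let dc := if min_c = 0 then max_c - min_c + 1
               else if max_c = w - 1 then -(max_c - min_c + 1) else 0
     e.2.all (fun p =>
       -h ≤ p.1 + dr ∧ p.1 + dr < h ∧ -w ≤ p.2 + dc ∧ p.2 + dc < w)))

-- Pre_: exactly the inputs on which Python A returns normally: a nonempty grid with at
-- least one cell, no row shorter than row 0 (a shorter row raises IndexError in the scan;
-- columns beyond row 0's width are ignored by A and B alike), and every shifted component
-- write inside Python's index range (an out-of-range out[nr][nc] raises IndexError).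
def Pre_transform (grid : List (List Int)) : Prop :=
  grid ≠ [] ∧ pvFlat grid ≠ [] ∧
  (∀ row ∈ grid, (grid.headD []).length ≤ row.length) ∧
  pvSafe grid = true
instance (grid : List (List Int)) : Decidable (Pre_transform grid) := by
  unfold Pre_transform; infer_instance

def pvWitness_transform : List (List Int) := [[0, 0, 0], [0, 1, 0], [0, 1, 2]]

def Spec_transform (grid : List (List Int)) (out : List (List Int)) : Prop := out = transform_alt grid
instance (grid : List (List Int)) (out : List (List Int)) : Decidable (Spec_transform grid out) := by unfold Spec_transform; infer_instance

-- ===== CLAIM (what is proved, stated in full; the proofs are below) =====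
def Claim_equal_transform : Prop := ∀ (grid : List (List Int)), Dom_transform grid → Pre_transform grid → Spec_transform grid (transform grid)

-- ===== LEMMAS AND PROOFS =====

-- ---------- generic index/write lemmas ----------

def pvNorm (len : Nat) (i : Int) : Nat := if 0 ≤ i then i.toNat else len - (-i).toNat

theorem pvSetD_cases {α : Type} (xs : List α) (i : Int) (v : α) :
    PySem.List.pySetD xs i v =
      if PySem.Raise.InRange xs.length i then xs.set (pvNorm xs.length i) v else xs := by
  simp only [PySem.List.pySetD, PySem.List.pySet?, PySem.List.pyIdx?, PySem.Raise.InRange, pvNorm]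
  split_ifs with h1 h2 h3 <;> simp_all <;> omega

theorem pvGetD_cases {α : Type} (xs : List α) (i : Int) (d : α) :
    PySem.List.pyGetD xs i d =
      if PySem.Raise.InRange xs.length i then xs.getD (pvNorm xs.length i) d else d := by
  simp only [PySem.List.pyGetD, PySem.List.pyGet?, PySem.List.pyIdx?, PySem.Raise.InRange, pvNorm,
    List.getD_eq_getElem?_getD]
  split_ifs with h1 h2 h3 <;> simp_all <;> omega

theorem pvNorm_lt (len : Nat) (i : Int) (h : PySem.Raise.InRange len i) : pvNorm len i < len := by
  rcases h with ⟨h1, h2⟩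
  simp only [pvNorm]
  split_ifs <;> omega

theorem pvWrite_eq (out : List (List Int)) (r c v : Int) :
    pvWrite out r c v =
      if PySem.Raise.InRange out.length r ∧
          PySem.Raise.InRange (out.getD (pvNorm out.length r) []).length c then
        out.set (pvNorm out.length r)
          ((out.getD (pvNorm out.length r) []).set
            (pvNorm (out.getD (pvNorm out.length r) []).length c) v)
      else out := by
  unfold pvWrite
  rw [pvGetD_cases, pvSetD_cases (xs := out)]
  by_cases hr : PySem.Raise.InRange out.length r
  · simp only [if_pos hr]
    rw [pvSetD_cases]
    by_cases hc : PySem.Raise.InRange (out.getD (pvNorm out.length r) []).length c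
    · simp only [if_pos hc, if_pos (And.intro hr hc)]
    · have hcond : ¬(PySem.Raise.InRange out.length r ∧
          PySem.Raise.InRange (out.getD (pvNorm out.length r) []).length c) := fun hh => hc hh.2
      rw [if_neg hc, if_neg hcond]
      conv_lhs => rw [List.getD_eq_getElem?_getD, List.getElem?_eq_getElem (pvNorm_lt _ _ hr)]
      exact List.set_getElem_self (pvNorm_lt _ _ hr)
  · have hcond : ¬(PySem.Raise.InRange out.length r ∧
        PySem.Raise.InRange (out.getD (pvNorm out.length r) []).length c) := fun hh => hr hh.1
    rw [if_neg hr, if_neg hcond]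

theorem pvGetDset_self {α : Type} (l : List α) (i : Nat) (x : α) (d : α) (h : i < l.length) :
    (l.set i x).getD i d = x := by
  rw [List.getD_eq_getElem?_getD, List.getElem?_set_self h]; rfl

theorem pvGetDset_ne {α : Type} (l : List α) (i j : Nat) (x : α) (d : α) (h : i ≠ j) :
    (l.set i x).getD j d = l.getD j d := by
  rw [List.getD_eq_getElem?_getD, List.getElem?_set_ne h, ← List.getD_eq_getElem?_getD]

theorem pvWrite_comm_noop (out : List (List Int)) (r c r' c' v : Int)
    (hP : ¬(PySem.Raise.InRange out.length r ∧
      PySem.Raise.InRange (out.getD (pvNorm out.length r) []).length c)) :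
    pvWrite (pvWrite out r c v) r' c' v = pvWrite (pvWrite out r' c' v) r c v := by
    have h1 : pvWrite out r c v = out := by rw [pvWrite_eq, if_neg hP]
    rw [h1]
    by_cases hQ : PySem.Raise.InRange out.length r' ∧
        PySem.Raise.InRange (out.getD (pvNorm out.length r') []).length c'
    case neg =>
      have h2 : pvWrite out r' c' v = out := by rw [pvWrite_eq, if_neg hQ]
      rw [h2, h1]
    case pos =>
      have h2 : pvWrite out r' c' v =
          out.set (pvNorm out.length r')
            ((out.getD (pvNorm out.length r') []).set
              (pvNorm (out.getD (pvNorm out.length r') []).length c') v) := by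
        rw [pvWrite_eq, if_pos hQ]
      rw [h2, pvWrite_eq]
      rw [if_neg]
      intro hP'
      apply hP
      have hlen : (out.set (pvNorm out.length r')
          ((out.getD (pvNorm out.length r') []).set
            (pvNorm (out.getD (pvNorm out.length r') []).length c') v)).length = out.length := by
        simp
      rw [hlen] at hP'
      refine ⟨hP'.1, ?_⟩
      rcases hP' with ⟨hr, hc⟩
      by_cases hab : pvNorm out.length r' = pvNorm out.length r
      · rw [hab] at hc
        rw [pvGetDset_self _ _ _ _ (pvNorm_lt _ _ hr)] at hc
        simpa using hc
      · rwa [pvGetDset_ne _ _ _ _ _ hab] at hc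

theorem pvWrite_comm (out : List (List Int)) (r c r' c' v : Int) :
    pvWrite (pvWrite out r c v) r' c' v = pvWrite (pvWrite out r' c' v) r c v := by
  by_cases hP : PySem.Raise.InRange out.length r ∧
      PySem.Raise.InRange (out.getD (pvNorm out.length r) []).length c
  case neg => exact pvWrite_comm_noop out r c r' c' v hP
  case pos =>
    by_cases hQ : PySem.Raise.InRange out.length r' ∧
        PySem.Raise.InRange (out.getD (pvNorm out.length r') []).length c'
    case neg => exact (pvWrite_comm_noop out r' c' r c v hQ).symm
    case pos =>
      have h1 : pvWrite out r c v =
          out.set (pvNorm out.length r)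
            ((out.getD (pvNorm out.length r) []).set
              (pvNorm (out.getD (pvNorm out.length r) []).length c) v) := by
        rw [pvWrite_eq, if_pos hP]
      have h2 : pvWrite out r' c' v =
          out.set (pvNorm out.length r')
            ((out.getD (pvNorm out.length r') []).set
              (pvNorm (out.getD (pvNorm out.length r') []).length c') v) := by
        rw [pvWrite_eq, if_pos hQ]
      have ha : pvNorm out.length r < out.length := pvNorm_lt _ _ hP.1
      have hb : pvNorm out.length r' < out.length := pvNorm_lt _ _ hQ.1
      by_cases hab : pvNorm out.length r' = pvNorm out.length r
      · -- same target row
        rw [hab] at h2 hQ hb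
        rw [h1, h2, pvWrite_eq, pvWrite_eq]
        simp only [List.length_set, hab]
        rw [pvGetDset_self _ _ _ _ ha, pvGetDset_self _ _ _ _ ha]
        simp only [List.length_set]
        rw [if_pos ⟨hQ.1, hQ.2⟩, if_pos ⟨hP.1, hP.2⟩, List.set_set, List.set_set]
        by_cases hcc : pvNorm (out.getD (pvNorm out.length r) []).length c =
            pvNorm (out.getD (pvNorm out.length r) []).length c'
        · rw [hcc]
        · rw [List.set_comm _ _ (fun hh => hcc hh.symm)]
      · -- different target rows
        rw [h1, h2, pvWrite_eq, pvWrite_eq]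
        simp only [List.length_set]
        rw [pvGetDset_ne _ _ _ _ _ hab, pvGetDset_ne _ _ _ _ _ (fun hh => hab hh.symm)]
        rw [if_pos ⟨hQ.1, hQ.2⟩, if_pos ⟨hP.1, hP.2⟩]
        rw [List.set_comm _ _ (fun hh => hab hh.symm)]

-- ---------- min/max of nonempty int lists ----------

theorem pvFoldlMin_mem : ∀ (xs : List Int) (x : Int), xs.foldl min x ∈ x :: xs := by
  intro xs
  induction xs with
  | nil => simp
  | cons y ys ih =>
    intro x
    simp only [List.foldl_cons]
    rcases List.mem_cons.mp (ih (min x y)) with h | h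
    · rcases min_choice x y with hm | hm <;> rw [h, hm] <;> simp
    · exact List.mem_cons_of_mem _ (List.mem_cons_of_mem _ h)

theorem pvFoldlMin_le : ∀ (xs : List Int) (x : Int), ∀ y ∈ x :: xs, xs.foldl min x ≤ y := by
  intro xs
  induction xs with
  | nil => intro x y hy; simp at hy; simp [hy]
  | cons z zs ih =>
    intro x y hy
    simp only [List.foldl_cons]
    rcases List.mem_cons.mp hy with rfl | hy'
    · exact le_trans (ih (min y z) _ List.mem_cons_self) (min_le_left _ _)
    · rcases List.mem_cons.mp hy' with rfl | hy''
      · exact le_trans (ih (min x y) _ List.mem_cons_self) (min_le_right _ _)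
      · exact ih (min x z) _ (List.mem_cons_of_mem _ hy'')

theorem pvFoldlMax_mem : ∀ (xs : List Int) (x : Int), xs.foldl max x ∈ x :: xs := by
  intro xs
  induction xs with
  | nil => simp
  | cons y ys ih =>
    intro x
    simp only [List.foldl_cons]
    rcases List.mem_cons.mp (ih (max x y)) with h | h
    · rcases max_choice x y with hm | hm <;> rw [h, hm] <;> simp
    · exact List.mem_cons_of_mem _ (List.mem_cons_of_mem _ h)

theorem pvFoldlMax_le : ∀ (xs : List Int) (x : Int), ∀ y ∈ x :: xs, y ≤ xs.foldl max x := by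
  intro xs
  induction xs with
  | nil => intro x y hy; simp at hy; simp [hy]
  | cons z zs ih =>
    intro x y hy
    simp only [List.foldl_cons]
    rcases List.mem_cons.mp hy with rfl | hy'
    · exact le_trans (le_max_left _ _) (ih (max y z) _ List.mem_cons_self)
    · rcases List.mem_cons.mp hy' with rfl | hy''
      · exact le_trans (le_max_right _ _) (ih (max x y) _ List.mem_cons_self)
      · exact ih (max x z) _ (List.mem_cons_of_mem _ hy'')

theorem pvMinL_mem {l : List Int} (h : l ≠ []) : pvMinL l ∈ l := by
  cases l with
  | nil => simp at h
  | cons x xs => exact pvFoldlMin_mem xs x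

theorem pvMinL_le {l : List Int} : ∀ y ∈ l, pvMinL l ≤ y := by
  cases l with
  | nil => simp
  | cons x xs => exact pvFoldlMin_le xs x

theorem pvMaxL_mem {l : List Int} (h : l ≠ []) : pvMaxL l ∈ l := by
  cases l with
  | nil => simp at h
  | cons x xs => exact pvFoldlMax_mem xs x

theorem pvMaxL_le {l : List Int} : ∀ y ∈ l, y ≤ pvMaxL l := by
  cases l with
  | nil => simp
  | cons x xs => exact pvFoldlMax_le xs x

theorem pvMinL_perm {l l' : List Int} (hp : l.Perm l') : pvMinL l = pvMinL l' := by
  cases l with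
  | nil => rw [← hp.nil_eq]
  | cons x xs =>
    have hne : (x :: xs : List Int) ≠ [] := by simp
    have hne' : l' ≠ [] := by
      intro h; subst h; exact hne hp.symm.nil_eq.symm
    exact le_antisymm (pvMinL_le _ (hp.symm.subset (pvMinL_mem hne')))
      (pvMinL_le _ (hp.subset (pvMinL_mem hne)))

theorem pvMaxL_perm {l l' : List Int} (hp : l.Perm l') : pvMaxL l = pvMaxL l' := by
  cases l with
  | nil => rw [← hp.nil_eq]
  | cons x xs =>
    have hne : (x :: xs : List Int) ≠ [] := by simp
    have hne' : l' ≠ [] := by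
      intro h; subst h; exact hne hp.symm.nil_eq.symm
    exact le_antisymm (pvMaxL_le _ (hp.subset (pvMaxL_mem hne)))
      (pvMaxL_le _ (hp.symm.subset (pvMaxL_mem hne')))

theorem pvShift_perm (h w : Int) {c c' : List (Int × Int)} (hp : c.Perm c') :
    pvShift h w c = pvShift h w c' := by
  unfold pvShift
  rw [pvMinL_perm (hp.map Prod.fst), pvMaxL_perm (hp.map Prod.fst),
      pvMinL_perm (hp.map Prod.snd), pvMaxL_perm (hp.map Prod.snd)]

-- ---------- render respects per-component permutations ----------

theorem pvWriteFold_perm {comp comp' : List (Int × Int)} (hp : comp.Perm comp')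
    (dr dc v : Int) (out : List (List Int)) :
    comp.foldl (fun o p => pvWrite o (p.1 + dr) (p.2 + dc) v) out =
      comp'.foldl (fun o p => pvWrite o (p.1 + dr) (p.2 + dc) v) out := by
  letI : RightCommutative (fun (o : List (List Int)) (p : Int × Int) =>
      pvWrite o (p.1 + dr) (p.2 + dc) v) := ⟨fun o p q => pvWrite_comm o _ _ _ _ _⟩
  exact hp.foldl_eq out

theorem pvWriteFold0_perm {comp comp' : List (Int × Int)} (hp : comp.Perm comp')
    (v : Int) (out : List (List Int)) :
    comp.foldl (fun o p => pvWrite o p.1 p.2 v) out =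
      comp'.foldl (fun o p => pvWrite o p.1 p.2 v) out := by
  letI : RightCommutative (fun (o : List (List Int)) (p : Int × Int) =>
      pvWrite o p.1 p.2 v) := ⟨fun o p q => pvWrite_comm o _ _ _ _ _⟩
  exact hp.foldl_eq out

theorem pvCompsFold0_congr {cs cs' : List (List (Int × Int))}
    (hcs : List.Forall₂ List.Perm cs cs') (v : Int) (out : List (List Int)) :
    cs.foldl (fun o comp => comp.foldl (fun o p => pvWrite o p.1 p.2 v) o) out =
      cs'.foldl (fun o comp => comp.foldl (fun o p => pvWrite o p.1 p.2 v) o) out := by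
  induction hcs generalizing out with
  | nil => rfl
  | cons hcc htail ihtail =>
    simp only [List.foldl_cons]
    rw [pvWriteFold0_perm hcc]
    exact ihtail _

theorem pvCompsFoldS_congr (h w : Int) {cs cs' : List (List (Int × Int))}
    (hcs : List.Forall₂ List.Perm cs cs') (v : Int) (out : List (List Int)) :
    cs.foldl (fun o comp =>
        let s := pvShift h w comp
        comp.foldl (fun o p => pvWrite o (p.1 + s.1) (p.2 + s.2) v) o) out =
      cs'.foldl (fun o comp =>
        let s := pvShift h w comp
        comp.foldl (fun o p => pvWrite o (p.1 + s.1) (p.2 + s.2) v) o) out := by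
  induction hcs generalizing out with
  | nil => rfl
  | cons hcc htail ihtail =>
    simp only [List.foldl_cons]
    rw [pvShift_perm h w hcc, pvWriteFold_perm hcc]
    exact ihtail _

def pvDictRel (d d' : PySem.Dict Int (List (List (Int × Int)))) : Prop :=
  d.keys = d'.keys ∧ d.keys.Nodup ∧
    ∀ k : Int, List.Forall₂ List.Perm (d.getD k []) (d'.getD k [])

theorem pvRender_congr (h w bg : Int) (d d' : PySem.Dict Int (List (List (Int × Int))))
    (hrel : pvDictRel d d') : pvRender h w bg d = pvRender h w bg d' := by
  obtain ⟨hkeys, hnd, hvals⟩ := hrel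
  unfold pvRender
  rw [PySem.Dict.items_eq_map_keys d hnd [], PySem.Dict.items_eq_map_keys d' (hkeys ▸ hnd) [],
    ← hkeys, List.foldl_map, List.foldl_map]
  generalize (List.replicate h.toNat (List.replicate w.toNat bg)) = out0
  induction d.keys generalizing out0 with
  | nil => rfl
  | cons k ks ih =>
    simp only [List.foldl_cons]
    rw [ih]
    congr 1
    have hv := hvals k
    have hlen := hv.length_eq
    by_cases hb : (d.getD k []).length ≤ 1
    · simp only [if_pos hb, if_pos (hlen ▸ hb)]
      exact pvCompsFold0_congr hv k out0
    · simp only [if_neg hb, if_neg (hlen ▸ hb)]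
      exact pvCompsFoldS_congr h w hv k out0

-- ---------- the canonical component structure ----------

def pvInb (h w : Int) (p : Int × Int) : Prop :=
  0 ≤ p.1 ∧ p.1 < h ∧ 0 ≤ p.2 ∧ p.2 < w

def pvAdjacent (grid : List (List Int)) (h w : Int) (p q : Int × Int) : Prop :=
  pvInb h w p ∧ pvInb h w q ∧ pvCell grid q.1 q.2 = pvCell grid p.1 p.2 ∧
    ((q.1 = p.1 ∧ (q.2 = p.2 + 1 ∨ q.2 = p.2 - 1)) ∨
     (q.2 = p.2 ∧ (q.1 = p.1 + 1 ∨ q.1 = p.1 - 1)))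

def pvR (grid : List (List Int)) (h w : Int) : (Int × Int) → (Int × Int) → Prop :=
  Relation.ReflTransGen (pvAdjacent grid h w)

theorem pvAdjacent_symm (grid : List (List Int)) (h w : Int) :
    Symmetric (pvAdjacent grid h w) := by
  rintro p q ⟨hp, hq, hc, hs⟩
  refine ⟨hq, hp, hc.symm, ?_⟩
  rcases hs with ⟨h1, h2 | h2⟩ | ⟨h1, h2 | h2⟩
  · exact Or.inl ⟨h1.symm, Or.inr (by omega)⟩
  · exact Or.inl ⟨h1.symm, Or.inl (by omega)⟩
  · exact Or.inr ⟨h1.symm, Or.inr (by omega)⟩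
  · exact Or.inr ⟨h1.symm, Or.inl (by omega)⟩

theorem pvR_symm (grid : List (List Int)) (h w : Int) {p q : Int × Int}
    (hr : pvR grid h w p q) : pvR grid h w q p :=
  Relation.ReflTransGen.symmetric (pvAdjacent_symm grid h w) hr

theorem pvR_eq_or (grid : List (List Int)) (h w : Int) {p q : Int × Int}
    (hr : pvR grid h w p q) :
    p = q ∨ (pvInb h w p ∧ pvInb h w q ∧ pvCell grid q.1 q.2 = pvCell grid p.1 p.2) := by
  induction hr with
  | refl => exact Or.inl rfl
  | tail hseg hstep ih =>
    right
    obtain ⟨hb, hq, hc, _⟩ := hstep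
    rcases ih with rfl | ⟨hp, _, hc'⟩
    · exact ⟨hb, hq, hc⟩
    · exact ⟨hp, hq, hc.trans hc'⟩

theorem pvR_colour (grid : List (List Int)) (h w : Int) {p q : Int × Int}
    (hr : pvR grid h w p q) : pvCell grid q.1 q.2 = pvCell grid p.1 p.2 := by
  rcases pvR_eq_or grid h w hr with rfl | ⟨_, _, hc⟩
  · rfl
  · exact hc

theorem pvR_inb (grid : List (List Int)) (h w : Int) {p q : Int × Int}
    (hp : pvInb h w p) (hr : pvR grid h w p q) : pvInb h w q := by
  rcases pvR_eq_or grid h w hr with rfl | ⟨_, hq, _⟩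
  · exact hp
  · exact hq

def pvScanL (h w : Int) : List (Int × Int) :=
  (PySem.List.pyRange 0 h 1).flatMap (fun r => (PySem.List.pyRange 0 w 1).map (fun c => (r, c)))

noncomputable def pvClass (grid : List (List Int)) (h w : Int) (p : Int × Int) :
    List (Int × Int) :=
  (pvScanL h w).filter (fun q => @decide _ (Classical.propDecidable (pvR grid h w p q)))

def pvRepP (grid : List (List Int)) (h w : Int) (p : Int × Int) : Prop :=
  pvInb h w p ∧ pvCell grid p.1 p.2 ≠ pvBg grid ∧
    ∀ q, pvInb h w q → q.1 * w + q.2 < p.1 * w + p.2 → ¬ pvR grid h w p q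

noncomputable def pvReps (grid : List (List Int)) (h w : Int) : List (Int × Int) :=
  (pvScanL h w).filter (fun p => @decide _ (Classical.propDecidable (pvRepP grid h w p)))

noncomputable def pvCanon (grid : List (List Int)) (h w : Int) :
    PySem.Dict Int (List (List (Int × Int))) :=
  (pvReps grid h w).foldl
    (fun d p => d.modify (pvCell grid p.1 p.2) [] (· ++ [pvClass grid h w p])) PySem.Dict.empty

theorem pvMem_scanL {h w : Int} {p : Int × Int} : p ∈ pvScanL h w ↔ pvInb h w p := by
  unfold pvScanL pvInb
  simp only [List.mem_flatMap, List.mem_map, PySem.List.mem_pyRange_one]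
  constructor
  · rintro ⟨r, ⟨h0, h1⟩, c, ⟨h2, h3⟩, rfl⟩
    exact ⟨h0, h1, h2, h3⟩
  · rintro ⟨h0, h1, h2, h3⟩
    exact ⟨p.1, ⟨h0, h1⟩, p.2, ⟨h2, h3⟩, rfl⟩

theorem pvMem_class {grid : List (List Int)} {h w : Int} {p q : Int × Int} :
    q ∈ pvClass grid h w p ↔ pvInb h w q ∧ pvR grid h w p q := by
  unfold pvClass
  rw [List.mem_filter]
  constructor
  · rintro ⟨hm, hd⟩
    exact ⟨pvMem_scanL.mp hm, by
      have := of_decide_eq_true (inst := Classical.propDecidable _) hd; exact this⟩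
  · rintro ⟨hq, hr⟩
    exact ⟨pvMem_scanL.mpr hq, decide_eq_true (inst := Classical.propDecidable _) hr⟩

theorem pvMem_reps {grid : List (List Int)} {h w : Int} {p : Int × Int} :
    p ∈ pvReps grid h w ↔ pvRepP grid h w p := by
  unfold pvReps
  rw [List.mem_filter]
  constructor
  · rintro ⟨hm, hd⟩
    exact of_decide_eq_true (inst := Classical.propDecidable _) hd
  · intro hr
    exact ⟨pvMem_scanL.mpr hr.1, decide_eq_true (inst := Classical.propDecidable _) hr⟩

-- ---------- flattened-index arithmetic ----------

def pvPairOf (w i : Int) : Int × Int := (PySem.Int.floordiv i w, PySem.Int.mod i w)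

theorem pvPairOf_inb {h w i : Int} (hw : 0 < w) (h0 : 0 ≤ i) (h1 : i < h * w) :
    pvInb h w (pvPairOf w i) := by
  have hm0 := PySem.Int.mod_nonneg i hw
  have hm1 := PySem.Int.mod_lt i hw
  have hdm := PySem.Int.floordiv_mul_add_mod i w
  unfold pvPairOf
  refine ⟨?_, ?_, hm0, hm1⟩
  · exact (PySem.Int.le_floordiv_iff_mul_le hw).mpr (by simpa using h0)
  · exact (PySem.Int.floordiv_lt_iff_lt_mul hw).mpr h1

theorem pvSIdx_pairOf {w i : Int} (hw : 0 < w) :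
    (pvPairOf w i).1 * w + (pvPairOf w i).2 = i := PySem.Int.floordiv_mul_add_mod i w

theorem pvPairOf_sIdx {h w : Int} {p : Int × Int} (hw : 0 < w) (hp : pvInb h w p) :
    pvPairOf w (p.1 * w + p.2) = p := by
  obtain ⟨h0, h1, h2, h3⟩ := hp
  have hd : PySem.Int.floordiv (p.1 * w + p.2) w = p.1 :=
    (PySem.Int.floordiv_eq_iff_of_pos hw).mpr (by constructor <;> nlinarith)
  have hm : PySem.Int.mod (p.1 * w + p.2) w = p.2 := by
    have := PySem.Int.floordiv_mul_add_mod (p.1 * w + p.2) w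
    rw [hd] at this; omega
  unfold pvPairOf
  rw [hd, hm]

theorem pvSIdx_bounds {h w : Int} {p : Int × Int} (hp : pvInb h w p) :
    0 ≤ p.1 * w + p.2 ∧ p.1 * w + p.2 < h * w := by
  obtain ⟨h0, h1, h2, h3⟩ := hp
  constructor <;> nlinarith

theorem pvScanL_eq_map_nat (m : Nat) (w : Int) (hw : 0 < w) :
    pvScanL (m : Int) w = (PySem.List.pyRange 0 ((m : Int) * w) 1).map (pvPairOf w) := by
  induction m with
  | zero =>
    unfold pvScanL
    simp [PySem.List.pyRange_one_eq_nil (le_refl (0 : Int))]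
  | succ m ih =>
    have hm0 : (0 : Int) ≤ (m : Int) := by positivity
    have hstep : pvScanL ((m : Int) + 1) w = pvScanL (m : Int) w ++
        (PySem.List.pyRange 0 w 1).map (fun c => ((m : Int), c)) := by
      unfold pvScanL
      rw [PySem.List.pyRange_one_succ_right hm0]
      simp [List.flatMap_append]
    rw [Nat.cast_succ, hstep, ih]
    have hsplit : PySem.List.pyRange 0 (((m : Int) + 1) * w) 1 =
        PySem.List.pyRange 0 ((m : Int) * w) 1 ++
          PySem.List.pyRange ((m : Int) * w) (((m : Int) + 1) * w) 1 := by
      apply PySem.List.pyRange_one_append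
      · positivity
      · nlinarith
    rw [hsplit, List.map_append]
    congr 1
    have hblk : PySem.List.pyRange ((m : Int) * w) (((m : Int) + 1) * w) 1 =
        (PySem.List.pyRange 0 w 1).map (fun c => (m : Int) * w + c) := by
      rw [PySem.List.pyRange_one, PySem.List.pyRange_one]
      have he : (((m : Int) + 1) * w - (m : Int) * w) = w - 0 := by ring
      rw [he]
      simp
    rw [hblk, List.map_map]
    apply List.map_congr_left
    intro c hc
    rw [PySem.List.mem_pyRange_one] at hc
    have hpc : pvPairOf w ((m : Int) * w + c) = ((m : Int), c) :=
      pvPairOf_sIdx (h := (m : Int) + 1) hw (p := ((m : Int), c)) ⟨hm0, by omega, hc.1, hc.2⟩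
    simpa [Function.comp] using hpc.symm

theorem pvScanL_eq_map {h w : Int} (hh : 0 ≤ h) (hw : 0 ≤ w) :
    pvScanL h w = (PySem.List.pyRange 0 (h * w) 1).map (pvPairOf w) := by
  rcases eq_or_lt_of_le hw with rfl | hwpos
  · unfold pvScanL
    rw [mul_zero]
    simp [PySem.List.pyRange_one_eq_nil (le_refl (0 : Int))]
  · obtain ⟨m, rfl⟩ : ∃ m : Nat, (m : Int) = h := ⟨h.toNat, by omega⟩
    exact pvScanL_eq_map_nat m w hwpos

theorem pvNodup_scanL (h w : Int) (hh : 0 ≤ h) (hw : 0 ≤ w) : (pvScanL h w).Nodup := by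
  rcases eq_or_lt_of_le hw with rfl | hwpos
  · unfold pvScanL
    simp only [PySem.List.pyRange_one_eq_nil (le_refl (0 : Int)), List.map_nil]
    rw [List.flatMap_eq_nil_iff.mpr (fun _ _ => rfl)]
    exact List.nodup_nil
  · rw [pvScanL_eq_map hh hw]
    refine List.Nodup.map_on ?_ (PySem.List.nodup_pyRange_one 0 (h * w))
    intro i hi j hj hij
    rw [PySem.List.mem_pyRange_one] at hi hj
    have h1 := pvSIdx_pairOf (i := i) hwpos
    have h2 := pvSIdx_pairOf (i := j) hwpos
    rw [← h1, ← h2, hij]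


theorem pvNodup_class (grid : List (List Int)) (h w : Int) (p : Int × Int)
    (hh : 0 ≤ h) (hw : 0 ≤ w) : (pvClass grid h w p).Nodup :=
  (pvNodup_scanL h w hh hw).filter _

-- ---------- B-side: neighbour lists ----------

theorem pvMemIte {α : Type} (P : Prop) [Decidable P] (a x : α) :
    (x ∈ if P then [a] else []) ↔ P ∧ x = a := by
  split <;> simp_all

theorem pvPairOf_mul_add {w : Int} (hw : 0 < w) (a b : Int) (hb0 : 0 ≤ b) (hb1 : b < w) :
    pvPairOf w (a * w + b) = (a, b) := by
  have hd : PySem.Int.floordiv (a * w + b) w = a :=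
    (PySem.Int.floordiv_eq_iff_of_pos hw).mpr (by constructor <;> nlinarith)
  have hm : PySem.Int.mod (a * w + b) w = b := by
    have := PySem.Int.floordiv_mul_add_mod (a * w + b) w
    rw [hd] at this; omega
  unfold pvPairOf
  rw [hd, hm]

theorem pvColAt_pair (grid : List (List Int)) (w i : Int) :
    pvColAt grid w i = pvCell grid (pvPairOf w i).1 (pvPairOf w i).2 := rfl

theorem pvMem_nbrs {grid : List (List Int)} {h w n i : Int} (hw : 0 < w) (hn : n = h * w)
    (h0 : 0 ≤ i) (h1 : i < n) (j : Int) :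
    j ∈ pvNbrs grid h w i ↔
      0 ≤ j ∧ j < n ∧ pvAdjacent grid h w (pvPairOf w i) (pvPairOf w j) := by
  subst hn
  have hfst : PySem.Int.floordiv i w = (pvPairOf w i).1 := rfl
  have hsnd : PySem.Int.mod i w = (pvPairOf w i).2 := rfl
  have hm0 : 0 ≤ (pvPairOf w i).2 := PySem.Int.mod_nonneg i hw
  have hm1 : (pvPairOf w i).2 < w := PySem.Int.mod_lt i hw
  have hdm : (pvPairOf w i).1 * w + (pvPairOf w i).2 = i := PySem.Int.floordiv_mul_add_mod i w
  have hinb : pvInb h w (pvPairOf w i) := pvPairOf_inb hw h0 h1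
  obtain ⟨hr0, hr1, hc0, hc1⟩ := hinb
  have hpw : 0 ≤ (pvPairOf w i).1 * w := mul_nonneg hr0 hw.le
  unfold pvNbrs
  rw [List.mem_filter, hfst, hsnd]
  simp only [List.mem_append, pvMemIte]
  constructor
  · rintro ⟨hcand, hcol⟩
    have hcol' : pvColAt grid w j = pvColAt grid w i := by
      simpa using of_decide_eq_true hcol
    rcases hcand with ((⟨hf, rfl⟩ | ⟨hf, rfl⟩) | ⟨hf, rfl⟩) | ⟨hf, rfl⟩
    · -- up: j = i - w
      have hp : pvPairOf w (i - w) = ((pvPairOf w i).1 - 1, (pvPairOf w i).2) := by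
        have he : i - w = ((pvPairOf w i).1 - 1) * w + (pvPairOf w i).2 := by nlinarith
        rw [he]; exact pvPairOf_mul_add hw _ _ hm0 hm1
      have e1 : PySem.Int.floordiv (i - w) w = (pvPairOf w i).1 - 1 := congrArg Prod.fst hp
      have e2 : PySem.Int.mod (i - w) w = (pvPairOf w i).2 := congrArg Prod.snd hp
      refine ⟨by nlinarith, by nlinarith, ?_⟩
      rw [hp]
      refine ⟨⟨hr0, hr1, hc0, hc1⟩, ⟨by omega, by omega, hm0, hm1⟩, ?_, ?_⟩
      · show pvCell grid ((pvPairOf w i).1 - 1) ((pvPairOf w i).2) = _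
        conv_lhs => rw [← e1, ← e2]
        exact hcol'
      · exact Or.inr ⟨rfl, Or.inr rfl⟩
    · -- down: j = i + w
      have hp : pvPairOf w (i + w) = ((pvPairOf w i).1 + 1, (pvPairOf w i).2) := by
        have he : i + w = ((pvPairOf w i).1 + 1) * w + (pvPairOf w i).2 := by nlinarith
        rw [he]; exact pvPairOf_mul_add hw _ _ hm0 hm1
      have e1 : PySem.Int.floordiv (i + w) w = (pvPairOf w i).1 + 1 := congrArg Prod.fst hp
      have e2 : PySem.Int.mod (i + w) w = (pvPairOf w i).2 := congrArg Prod.snd hp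
      refine ⟨by nlinarith, by nlinarith, ?_⟩
      rw [hp]
      refine ⟨⟨hr0, hr1, hc0, hc1⟩, ⟨by omega, by omega, hm0, hm1⟩, ?_, ?_⟩
      · show pvCell grid ((pvPairOf w i).1 + 1) ((pvPairOf w i).2) = _
        conv_lhs => rw [← e1, ← e2]
        exact hcol'
      · exact Or.inr ⟨rfl, Or.inl rfl⟩
    · -- left: j = i - 1
      have hp : pvPairOf w (i - 1) = ((pvPairOf w i).1, (pvPairOf w i).2 - 1) := by
        have he : i - 1 = (pvPairOf w i).1 * w + ((pvPairOf w i).2 - 1) := by omega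
        rw [he]; exact pvPairOf_mul_add hw _ _ (by omega) (by omega)
      have e1 : PySem.Int.floordiv (i - 1) w = (pvPairOf w i).1 := congrArg Prod.fst hp
      have e2 : PySem.Int.mod (i - 1) w = (pvPairOf w i).2 - 1 := congrArg Prod.snd hp
      refine ⟨by omega, by omega, ?_⟩
      rw [hp]
      refine ⟨⟨hr0, hr1, hc0, hc1⟩, ⟨hr0, hr1, by omega, by omega⟩, ?_, ?_⟩
      · show pvCell grid ((pvPairOf w i).1) ((pvPairOf w i).2 - 1) = _
        conv_lhs => rw [← e1, ← e2]
        exact hcol'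
      · exact Or.inl ⟨rfl, Or.inr rfl⟩
    · -- right: j = i + 1
      have hp : pvPairOf w (i + 1) = ((pvPairOf w i).1, (pvPairOf w i).2 + 1) := by
        have he : i + 1 = (pvPairOf w i).1 * w + ((pvPairOf w i).2 + 1) := by omega
        rw [he]; exact pvPairOf_mul_add hw _ _ (by omega) (by omega)
      have e1 : PySem.Int.floordiv (i + 1) w = (pvPairOf w i).1 := congrArg Prod.fst hp
      have e2 : PySem.Int.mod (i + 1) w = (pvPairOf w i).2 + 1 := congrArg Prod.snd hp
      refine ⟨by omega, by nlinarith, ?_⟩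
      rw [hp]
      refine ⟨⟨hr0, hr1, hc0, hc1⟩, ⟨hr0, hr1, by omega, by omega⟩, ?_, ?_⟩
      · show pvCell grid ((pvPairOf w i).1) ((pvPairOf w i).2 + 1) = _
        conv_lhs => rw [← e1, ← e2]
        exact hcol'
      · exact Or.inl ⟨rfl, Or.inl rfl⟩
  · rintro ⟨hj0, hj1, _, hqinb, hcol, hshape⟩
    have hjs : (pvPairOf w j).1 * w + (pvPairOf w j).2 = j := pvSIdx_pairOf hw
    obtain ⟨hq0, hq1, hq2, hq3⟩ := hqinb
    have hcol2 : decide (pvColAt grid w j = pvColAt grid w i) = true := by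
      rw [decide_eq_true_eq]
      exact hcol
    refine ⟨?_, by simpa using hcol2⟩
    rcases hshape with ⟨he, hv | hv⟩ | ⟨he, hv | hv⟩
    · -- right: j = i + 1
      right
      rw [he] at hjs
      rw [hv] at hjs
      exact ⟨by omega, by omega⟩
    · -- left: j = i - 1
      left; right
      rw [he] at hjs
      rw [hv] at hjs
      exact ⟨by omega, by omega⟩
    · -- down: j = i + w
      left; left; right
      rw [hv] at hjs
      rw [he, add_mul, one_mul] at hjs
      refine ⟨by omega, by omega⟩
    · -- up: j = i - w
      left; left; left
      rw [hv] at hjs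
      rw [he, sub_mul, one_mul] at hjs
      refine ⟨by omega, by omega⟩

-- ---------- B-side: minimum-label propagation ----------

theorem pvGetD_eq_getElem {l : List Int} {k : Nat} (hk : k < l.length) :
    l.getD k 0 = l[k] := by
  rw [List.getD_eq_getElem?_getD, List.getElem?_eq_getElem hk]
  rfl

def pvGoodLab (grid : List (List Int)) (h w : Int) (lab : List Int) : Prop :=
  lab.length = (h * w).toNat ∧ ∀ k : Nat, k < (h * w).toNat →
    ∃ m : Nat, m < (h * w).toNat ∧ lab.getD k 0 = (m : Int) ∧
      pvR grid h w (pvPairOf w (k : Int)) (pvPairOf w (m : Int))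

theorem pvLab_toNat (lab : List Int) (i : Int) (h0 : 0 ≤ i) :
    pvLab lab i = lab.getD i.toNat 0 := by
  unfold pvLab
  exact PySem.List.pyGetD_of_nonneg lab 0 h0

theorem pvPass_length (grid : List (List Int)) (h w n : Int) (lab : List Int) :
    (pvPass grid h w n lab).length = n.toNat := by
  unfold pvPass
  rw [List.length_map, PySem.List.length_pyRange_one]
  simp

theorem pvPass_getD (grid : List (List Int)) (h w n : Int) (lab : List Int) (k : Nat)
    (hk : k < n.toNat) :
    (pvPass grid h w n lab).getD k 0 =
      pvMinL (pvLab lab (k : Int) :: (pvNbrs grid h w (k : Int)).map (pvLab lab)) := by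
  have hlen : k < (pvPass grid h w n lab).length := by rw [pvPass_length]; exact hk
  rw [pvGetD_eq_getElem hlen]
  unfold pvPass at hlen ⊢
  rw [List.getElem_map, PySem.List.getElem_pyRange_one, zero_add]

theorem pvGood_nonneg {grid : List (List Int)} {h w : Int} {lab : List Int}
    (hg : pvGoodLab grid h w lab) : ∀ k : Nat, k < lab.length → 0 ≤ lab.getD k 0 := by
  intro k hk
  obtain ⟨m, _, hv, _⟩ := hg.2 k (by rw [← hg.1]; exact hk)
  rw [hv]
  positivity

theorem pvSum_nonneg_of_getD {l : List Int} (hpos : ∀ k : Nat, k < l.length → 0 ≤ l.getD k 0) :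
    0 ≤ l.sum := by
  apply List.sum_nonneg
  intro x hx
  obtain ⟨k, hk, rfl⟩ := List.mem_iff_getElem.mp hx
  rw [← pvGetD_eq_getElem hk]
  exact hpos k hk

theorem pvSum_le_pointwise : ∀ (l l' : List Int), l'.length = l.length →
    (∀ k : Nat, k < l.length → l'.getD k 0 ≤ l.getD k 0) → l'.sum ≤ l.sum := by
  intro l
  induction l with
  | nil =>
    intro l' hl _
    rw [List.length_eq_zero_iff.mp hl]
  | cons x xs ih =>
    intro l' hl hle
    cases l' with
    | nil => simp at hl
    | cons y ys =>
      simp only [List.sum_cons]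
      have h0 := hle 0 (by simp)
      simp only [List.getD_cons_zero] at h0
      have htail : ys.sum ≤ xs.sum := by
        apply ih ys (by simpa using hl)
        intro k hk
        have := hle (k + 1) (by simpa using hk)
        simpa [List.getD_cons_succ] using this
      omega

theorem pvSum_lt_pointwise : ∀ (l l' : List Int), l'.length = l.length →
    (∀ k : Nat, k < l.length → l'.getD k 0 ≤ l.getD k 0) → l' ≠ l → l'.sum < l.sum := by
  intro l
  induction l with
  | nil =>
    intro l' hl _ hne
    exact absurd (List.length_eq_zero_iff.mp hl) hne
  | cons x xs ih =>
    intro l' hl hle hne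
    cases l' with
    | nil => simp at hl
    | cons y ys =>
      simp only [List.sum_cons]
      have h0 := hle 0 (by simp)
      simp only [List.getD_cons_zero] at h0
      have htle : ∀ k : Nat, k < xs.length → ys.getD k 0 ≤ xs.getD k 0 := by
        intro k hk
        have := hle (k + 1) (by simpa using hk)
        simpa [List.getD_cons_succ] using this
      rcases eq_or_lt_of_le h0 with rfl | hlt
      · have hys : ys ≠ xs := fun hh => hne (by rw [hh])
        have := ih ys (by simpa using hl) htle hys
        omega
      · have := pvSum_le_pointwise xs ys (by simpa using hl) htle
        omega

theorem pvGoodLab_init (grid : List (List Int)) (h w : Int) :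
    pvGoodLab grid h w (PySem.List.pyRange 0 (h * w) 1) := by
  constructor
  · rw [PySem.List.length_pyRange_one]; simp
  · intro k hk
    refine ⟨k, hk, ?_, Relation.ReflTransGen.refl⟩
    have hlen : k < (PySem.List.pyRange 0 (h * w) 1).length := by
      rw [PySem.List.length_pyRange_one]; simpa using hk
    rw [pvGetD_eq_getElem hlen, PySem.List.getElem_pyRange_one, zero_add]

theorem pvPass_good {grid : List (List Int)} {h w : Int} (hw : 0 < w) {lab : List Int}
    (hg : pvGoodLab grid h w lab) : pvGoodLab grid h w (pvPass grid h w (h * w) lab) := by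
  constructor
  · exact pvPass_length grid h w (h * w) lab
  · intro k hk
    rw [pvPass_getD grid h w (h * w) lab k hk]
    have hkk : ((k : Int)).toNat = k := by simp
    have hk1 : (k : Int) < h * w := by omega
    have hmem := pvMinL_mem (l := pvLab lab (k : Int) :: (pvNbrs grid h w (k : Int)).map (pvLab lab)) (by simp)
    rcases List.mem_cons.mp hmem with heq | hmem'
    · obtain ⟨m, hm, hv, hR⟩ := hg.2 k hk
      refine ⟨m, hm, ?_, hR⟩
      rw [heq, pvLab_toNat lab (k : Int) (by positivity), hkk, hv]
    · obtain ⟨j, hj, heq⟩ := List.mem_map.mp hmem'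
      obtain ⟨hj0, hj1, hadj⟩ := (pvMem_nbrs hw rfl (by positivity) hk1 j).mp hj
      have hjn : j.toNat < (h * w).toNat := by omega
      obtain ⟨m, hm, hv, hR⟩ := hg.2 j.toNat hjn
      refine ⟨m, hm, ?_, ?_⟩
      · rw [← heq, pvLab_toNat lab j hj0, hv]
      · have hcast : ((j.toNat : Nat) : Int) = j := Int.toNat_of_nonneg hj0
        rw [hcast] at hR
        exact Relation.ReflTransGen.head hadj hR

theorem pvIter_spec (grid : List (List Int)) (h w : Int) (hw : 0 < w) :
    ∀ (fuel : Nat) (lab : List Int), pvGoodLab grid h w lab →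
      lab.sum.toNat < fuel →
      pvGoodLab grid h w (pvIter grid h w (h * w) fuel lab) ∧
        pvPass grid h w (h * w) (pvIter grid h w (h * w) fuel lab) =
          pvIter grid h w (h * w) fuel lab := by
  intro fuel
  induction fuel with
  | zero => intro lab _ hs; omega
  | succ f ih =>
    intro lab hg hs
    by_cases hfix : pvPass grid h w (h * w) lab = lab
    · unfold pvIter
      rw [if_pos hfix]
      exact ⟨hg, hfix⟩
    · unfold pvIter
      rw [if_neg hfix]
      have hgood' := pvPass_good hw hg
      apply ih _ hgood'
      have hle : ∀ k : Nat, k < lab.length →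
          (pvPass grid h w (h * w) lab).getD k 0 ≤ lab.getD k 0 := by
        intro k hk
        rw [hg.1] at hk
        rw [pvPass_getD grid h w (h * w) lab k hk]
        refine le_trans (pvMinL_le _ List.mem_cons_self) ?_
        rw [pvLab_toNat lab (k : Int) (by positivity)]
        simp
      have hlt : (pvPass grid h w (h * w) lab).sum < lab.sum :=
        pvSum_lt_pointwise lab _ (by rw [pvPass_length, hg.1]) hle hfix
      have hnn : 0 ≤ (pvPass grid h w (h * w) lab).sum :=
        pvSum_nonneg_of_getD (pvGood_nonneg hgood')
      omega

theorem pvLabels_spec (grid : List (List Int)) (h w : Int) (hw : 0 < w) :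
    pvGoodLab grid h w (pvLabels grid h w (h * w)) ∧
      pvPass grid h w (h * w) (pvLabels grid h w (h * w)) =
        pvLabels grid h w (h * w) := by
  unfold pvLabels
  apply pvIter_spec grid h w hw _ _ (pvGoodLab_init grid h w)
  -- the initial sum is below (h*w).toNat ^ 2
  have hbound : (PySem.List.pyRange 0 (h * w) 1).sum ≤
      ((PySem.List.pyRange 0 (h * w) 1).length : Int) * (h * w) := by
    have := List.sum_le_card_nsmul (PySem.List.pyRange 0 (h * w) 1) (h * w)
      (fun x hx => le_of_lt (PySem.List.mem_pyRange_one.mp hx).2)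
    simpa [nsmul_eq_mul] using this
  have hlen : (PySem.List.pyRange 0 (h * w) 1).length = (h * w).toNat := by
    rw [PySem.List.length_pyRange_one]; simp
  rw [hlen] at hbound
  have h2 : ((h * w).toNat : Int) * (h * w) ≤ ((h * w).toNat : Int) * ((h * w).toNat : Int) := by
    by_cases hle : h * w ≤ 0
    · have hz : (h * w).toNat = 0 := by omega
      rw [hz]; simp
    · have hz : ((h * w).toNat : Int) = h * w := by omega
      rw [hz]
  have : (PySem.List.pyRange 0 (h * w) 1).sum ≤ ((h * w).toNat : Int) * ((h * w).toNat : Int) := le_trans hbound h2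
  have hcast : (((h * w).toNat : Int) * ((h * w).toNat : Int)) = (((h * w).toNat * (h * w).toNat : Nat) : Int) := by
    push_cast; ring
  omega

theorem pvFix_le {grid : List (List Int)} {h w : Int} {labF : List Int}
    (hfix : pvPass grid h w (h * w) labF = labF) (k : Nat) (hk : k < (h * w).toNat)
    (j : Int) (hj : j ∈ pvNbrs grid h w (k : Int)) :
    labF.getD k 0 ≤ pvLab labF j := by
  have h1 : labF.getD k 0 = pvMinL (pvLab labF (k : Int) ::
      (pvNbrs grid h w (k : Int)).map (pvLab labF)) := by
    conv_lhs => rw [← hfix]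
    exact pvPass_getD grid h w (h * w) labF k hk
  rw [h1]
  exact pvMinL_le _ (List.mem_cons_of_mem _ (List.mem_map_of_mem hj))

theorem pvFix_adj_eq {grid : List (List Int)} {h w : Int} {labF : List Int} (hw : 0 < w)
    (hfix : pvPass grid h w (h * w) labF = labF) (a b : Nat) (ha : a < (h * w).toNat)
    (hb : b < (h * w).toNat)
    (hadj : pvAdjacent grid h w (pvPairOf w (a : Int)) (pvPairOf w (b : Int))) :
    labF.getD a 0 = labF.getD b 0 := by
  have h1 : ((b : Int)) ∈ pvNbrs grid h w (a : Int) :=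
    (pvMem_nbrs hw rfl (by positivity) (by omega) _).mpr ⟨by positivity, by omega, hadj⟩
  have h2 : ((a : Int)) ∈ pvNbrs grid h w (b : Int) :=
    (pvMem_nbrs hw rfl (by positivity) (by omega) _).mpr
      ⟨by positivity, by omega, pvAdjacent_symm grid h w hadj⟩
  have l1 := pvFix_le hfix a ha _ h1
  have l2 := pvFix_le hfix b hb _ h2
  rw [pvLab_toNat _ _ (by positivity)] at l1 l2
  simp only [Int.toNat_natCast] at l1 l2
  omega

theorem pvFix_R_eq {grid : List (List Int)} {h w : Int} {labF : List Int} (hw : 0 < w)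
    (hfix : pvPass grid h w (h * w) labF = labF) {p q : Int × Int}
    (hr : pvR grid h w p q) (hp : pvInb h w p) :
    labF.getD ((p.1 * w + p.2).toNat) 0 = labF.getD ((q.1 * w + q.2).toNat) 0 := by
  induction hr with
  | refl => rfl
  | tail hseg hstep ih =>
    rename_i b c
    have hbin : pvInb h w b := hstep.1
    have hcin : pvInb h w c := hstep.2.1
    have hbb := pvSIdx_bounds hbin
    have hcb := pvSIdx_bounds hcin
    have hbcast : (((b.1 * w + b.2).toNat : Nat) : Int) = b.1 * w + b.2 :=
      Int.toNat_of_nonneg hbb.1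
    have hccast : (((c.1 * w + c.2).toNat : Nat) : Int) = c.1 * w + c.2 :=
      Int.toNat_of_nonneg hcb.1
    have hpb : pvPairOf w (((b.1 * w + b.2).toNat : Nat) : Int) = b := by
      rw [hbcast]; exact pvPairOf_sIdx hw hbin
    have hpc : pvPairOf w (((c.1 * w + c.2).toNat : Nat) : Int) = c := by
      rw [hccast]; exact pvPairOf_sIdx hw hcin
    have hadj : pvAdjacent grid h w (pvPairOf w (((b.1 * w + b.2).toNat : Nat) : Int))
        (pvPairOf w (((c.1 * w + c.2).toNat : Nat) : Int)) := by
      rw [hpb, hpc]; exact hstep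
    have := pvFix_adj_eq hw hfix (b.1 * w + b.2).toNat (c.1 * w + c.2).toNat
      (by omega) (by omega) hadj
    exact ih.trans this

theorem pvLabel_iff {grid : List (List Int)} {h w : Int} {labF : List Int} (hw : 0 < w)
    (hg : pvGoodLab grid h w labF) (hfix : pvPass grid h w (h * w) labF = labF)
    (k j : Nat) (hk : k < (h * w).toNat) (hj : j < (h * w).toNat) :
    labF.getD k 0 = labF.getD j 0 ↔ pvR grid h w (pvPairOf w (k : Int)) (pvPairOf w (j : Int)) := by
  constructor
  · intro heq
    obtain ⟨m, hm, hv, hR⟩ := hg.2 k hk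
    obtain ⟨m', hm', hv', hR'⟩ := hg.2 j hj
    have : (m : Int) = (m' : Int) := by rw [← hv, ← hv', heq]
    have hmm : m = m' := by exact_mod_cast this
    subst hmm
    exact hR.trans (pvR_symm grid h w hR')
  · intro hr
    have hkin : pvInb h w (pvPairOf w (k : Int)) := pvPairOf_inb hw (by positivity) (by omega)
    have h1 := pvFix_R_eq hw hfix hr hkin
    have hks : (pvPairOf w (k : Int)).1 * w + (pvPairOf w (k : Int)).2 = (k : Int) :=
      pvSIdx_pairOf hw
    have hjs : (pvPairOf w (j : Int)).1 * w + (pvPairOf w (j : Int)).2 = (j : Int) :=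
      pvSIdx_pairOf hw
    rw [hks, hjs] at h1
    simpa using h1

-- ---------- B-side: grouping by final label ----------

def pvLabAt (w : Int) (labF : List Int) (p : Int × Int) : Int :=
  labF.getD ((p.1 * w + p.2).toNat) 0

def pvPairsL (grid : List (List Int)) (w : Int) (labF : List Int) (m : Int) :
    List (Int × (Int × Int)) :=
  (PySem.List.pyRange 0 m 1).filterMap (fun i =>
    if pvColAt grid w i = pvBg grid then none else some (pvLab labF i, pvPairOf w i))

noncomputable def pvRepsPre (grid : List (List Int)) (h w : Int) (m : Int) :
    List (Int × Int) :=
  ((PySem.List.pyRange 0 m 1).map (pvPairOf w)).filter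
    (fun p => @decide _ (Classical.propDecidable (pvRepP grid h w p)))

theorem pvReps_eq_pre (grid : List (List Int)) (h w : Int) (hh : 0 ≤ h) (hw : 0 ≤ w) :
    pvReps grid h w = pvRepsPre grid h w (h * w) := by
  unfold pvReps pvRepsPre
  rw [pvScanL_eq_map hh hw]

theorem pvMem_keysPre (grid : List (List Int)) (w : Int) (labF : List Int) (m x : Int) :
    x ∈ PySem.Set.ofList ((pvPairsL grid w labF m).map (·.1)) ↔
      ∃ i : Int, 0 ≤ i ∧ i < m ∧ pvColAt grid w i ≠ pvBg grid ∧ pvLab labF i = x := by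
  rw [PySem.Set.mem_ofList]
  unfold pvPairsL
  simp only [List.mem_map, List.mem_filterMap, PySem.List.mem_pyRange_one]
  constructor
  · rintro ⟨e, ⟨i, ⟨hi0, hi1⟩, hfi⟩, rfl⟩
    by_cases hbg : pvColAt grid w i = pvBg grid
    · rw [if_pos hbg] at hfi; cases hfi
    · rw [if_neg hbg] at hfi
      cases hfi
      exact ⟨i, hi0, hi1, hbg, rfl⟩
  · rintro ⟨i, hi0, hi1, hbg, rfl⟩
    exact ⟨(pvLab labF i, pvPairOf w i), ⟨i, ⟨hi0, hi1⟩, by rw [if_neg hbg]⟩, rfl⟩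

theorem pvLabAt_pairOf (grid : List (List Int)) (h w : Int) (labF : List Int) (hw : 0 < w)
    (i : Int) (h0 : 0 ≤ i) (h1 : i < h * w) :
    pvLabAt w labF (pvPairOf w i) = pvLab labF i := by
  unfold pvLabAt
  rw [pvSIdx_pairOf hw, pvLab_toNat labF i h0]

theorem pvPairsL_succ_bg (grid : List (List Int)) (w : Int) (labF : List Int) (t : Nat)
    (hbg : pvColAt grid w (t : Int) = pvBg grid) :
    pvPairsL grid w labF ((t + 1 : Nat) : Int) = pvPairsL grid w labF (t : Int) := by
  unfold pvPairsL
  rw [show (((t + 1 : Nat)) : Int) = (t : Int) + 1 by push_cast; ring,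
    PySem.List.pyRange_one_succ_right (by positivity), List.filterMap_append]
  simp [hbg]

theorem pvPairsL_succ_nonbg (grid : List (List Int)) (w : Int) (labF : List Int) (t : Nat)
    (hbg : ¬ pvColAt grid w (t : Int) = pvBg grid) :
    pvPairsL grid w labF ((t + 1 : Nat) : Int) = pvPairsL grid w labF (t : Int) ++
      [(pvLab labF (t : Int), pvPairOf w (t : Int))] := by
  unfold pvPairsL
  rw [show (((t + 1 : Nat)) : Int) = (t : Int) + 1 by push_cast; ring,
    PySem.List.pyRange_one_succ_right (by positivity), List.filterMap_append]
  simp [hbg]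

theorem pvRepsPre_succ_pos (grid : List (List Int)) (h w : Int) (t : Nat)
    (hrep : pvRepP grid h w (pvPairOf w (t : Int))) :
    pvRepsPre grid h w ((t + 1 : Nat) : Int) = pvRepsPre grid h w (t : Int) ++
      [pvPairOf w (t : Int)] := by
  unfold pvRepsPre
  rw [show (((t + 1 : Nat)) : Int) = (t : Int) + 1 by push_cast; ring,
    PySem.List.pyRange_one_succ_right (by positivity), List.map_append, List.filter_append]
  congr 1
  simp only [List.map_cons, List.map_nil, List.filter_cons, List.filter_nil]
  rw [if_pos (decide_eq_true (inst := Classical.propDecidable _) hrep)]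

theorem pvRepsPre_succ_neg (grid : List (List Int)) (h w : Int) (t : Nat)
    (hrep : ¬ pvRepP grid h w (pvPairOf w (t : Int))) :
    pvRepsPre grid h w ((t + 1 : Nat) : Int) = pvRepsPre grid h w (t : Int) := by
  unfold pvRepsPre
  rw [show (((t + 1 : Nat)) : Int) = (t : Int) + 1 by push_cast; ring,
    PySem.List.pyRange_one_succ_right (by positivity), List.map_append, List.filter_append]
  have : List.filter (fun p => @decide _ (Classical.propDecidable (pvRepP grid h w p)))
      (List.map (pvPairOf w) [(t : Int)]) = [] := by
    simp only [List.map_cons, List.map_nil, List.filter_cons, List.filter_nil]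
    rw [if_neg]
    intro hdec
    exact hrep (of_decide_eq_true (inst := Classical.propDecidable _) hdec)
  rw [this, List.append_nil]

theorem pvKeys_prefix (grid : List (List Int)) (h w : Int) (labF : List Int)
    (hw : 0 < w) (hg : pvGoodLab grid h w labF)
    (hfix : pvPass grid h w (h * w) labF = labF) :
    ∀ t : Nat, (t : Int) ≤ h * w →
      PySem.Set.ofList ((pvPairsL grid w labF (t : Int)).map (·.1)) =
        (pvRepsPre grid h w (t : Int)).map (pvLabAt w labF) := by
  intro t
  induction t with
  | zero =>
    intro _
    unfold pvPairsL pvRepsPre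
    rw [PySem.List.pyRange_one_eq_nil (by simp)]
    rfl
  | succ t ih =>
    intro hle
    have htle : (t : Int) ≤ h * w := by push_cast at hle ⊢; omega
    have ht1 : (t : Int) < h * w := by push_cast at hle; omega
    have htn : ((t : Int)).toNat = t := by simp
    have hlabt : pvLab labF (t : Int) = labF.getD t 0 := by
      rw [pvLab_toNat labF (t : Int) (by positivity), htn]
    by_cases hbg : pvColAt grid w (t : Int) = pvBg grid
    · -- background cell: neither side changes
      rw [pvPairsL_succ_bg grid w labF t hbg]
      have hrep : ¬ pvRepP grid h w (pvPairOf w (t : Int)) := by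
        intro hrep
        exact hrep.2.1 (by rw [← pvColAt_pair]; exact hbg)
      rw [pvRepsPre_succ_neg grid h w t hrep]
      exact ih htle
    · rw [pvPairsL_succ_nonbg grid w labF t hbg, List.map_append]
      simp only [List.map_cons, List.map_nil]
      rw [PySem.Set.ofList_append_singleton]
      by_cases hrep : pvRepP grid h w (pvPairOf w (t : Int))
      · -- a new representative: its label is fresh
        have hnotmem : pvLab labF (t : Int) ∉
            PySem.Set.ofList ((pvPairsL grid w labF (t : Int)).map (·.1)) := by
          rw [pvMem_keysPre]
          rintro ⟨j, hj0, hj1, hjbg, hjlab⟩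
          have hjn : j.toNat < (h * w).toNat := by omega
          have htn' : t < (h * w).toNat := by omega
          have hlabeq : labF.getD j.toNat 0 = labF.getD t 0 := by
            rw [← pvLab_toNat labF j hj0, hjlab, hlabt]
          have hR := (pvLabel_iff hw hg hfix j.toNat t hjn htn').mp hlabeq
          have hcast : ((j.toNat : Nat) : Int) = j := Int.toNat_of_nonneg hj0
          rw [hcast] at hR
          have hqinb : pvInb h w (pvPairOf w j) := pvPairOf_inb hw hj0 (by omega)
          refine hrep.2.2 (pvPairOf w j) hqinb ?_ (pvR_symm grid h w hR)
          rw [pvSIdx_pairOf (i := j) hw, pvSIdx_pairOf (i := (t : Int)) hw]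
          omega
        rw [PySem.Set.add_of_not_mem hnotmem, ih htle,
          pvRepsPre_succ_pos grid h w t hrep, List.map_append]
        congr 1
        simp only [List.map_cons, List.map_nil]
        rw [pvLabAt_pairOf grid h w labF hw (t : Int) (by positivity) ht1]
      · -- not a representative: its label was seen before
        have hmem : pvLab labF (t : Int) ∈
            PySem.Set.ofList ((pvPairsL grid w labF (t : Int)).map (·.1)) := by
          rw [pvMem_keysPre]
          have hinb : pvInb h w (pvPairOf w (t : Int)) := pvPairOf_inb hw (by positivity) ht1
          have hcol : pvCell grid (pvPairOf w (t : Int)).1 (pvPairOf w (t : Int)).2 ≠ pvBg grid := by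
            rw [← pvColAt_pair]; exact hbg
          have hnall : ¬ (∀ q, pvInb h w q → q.1 * w + q.2 < (pvPairOf w (t : Int)).1 * w +
              (pvPairOf w (t : Int)).2 → ¬ pvR grid h w (pvPairOf w (t : Int)) q) := by
            intro hall
            exact hrep ⟨hinb, hcol, hall⟩
          push_neg at hnall
          obtain ⟨q, hqinb, hqlt, hqR⟩ := hnall
          refine ⟨q.1 * w + q.2, (pvSIdx_bounds hqinb).1, ?_, ?_, ?_⟩
          · rw [pvSIdx_pairOf (i := (t : Int)) hw] at hqlt
            omega
          · have hq : pvPairOf w (q.1 * w + q.2) = q := pvPairOf_sIdx hw hqinb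
            rw [pvColAt_pair, hq]
            have := pvR_colour grid h w hqR
            rw [this]
            exact hcol
          · have hqs := pvSIdx_bounds hqinb
            have hqn : (q.1 * w + q.2).toNat < (h * w).toNat := by omega
            have htn' : t < (h * w).toNat := by omega
            have hcast : (((q.1 * w + q.2).toNat : Nat) : Int) = q.1 * w + q.2 :=
              Int.toNat_of_nonneg hqs.1
            have hq : pvPairOf w (((q.1 * w + q.2).toNat : Nat) : Int) = q := by
              rw [hcast]; exact pvPairOf_sIdx hw hqinb
            have hR' : pvR grid h w (pvPairOf w (((q.1 * w + q.2).toNat : Nat) : Int))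
                (pvPairOf w ((t : Nat) : Int)) := by
              rw [hq]; exact pvR_symm grid h w hqR
            have hle2 := (pvLabel_iff hw hg hfix (q.1 * w + q.2).toNat t hqn htn').mpr hR'
            rw [pvLab_toNat labF (q.1 * w + q.2) hqs.1, hle2, hlabt]
        rw [PySem.Set.add_of_mem hmem, ih htle, pvRepsPre_succ_neg grid h w t hrep]

theorem pvFilterMap_aux {β : Type} (f : Int → Option (Int × β)) (g : Int → Bool)
    (v : Int → β) (l : Int) :
    ∀ L : List Int,
      (∀ i ∈ L, (g i = true → f i = some (l, v i)) ∧
        (g i = false → ∀ e : Int × β, f i = some e → e.1 ≠ l)) →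
      ((L.filterMap f).filter (fun e => e.1 == l)).map (·.2) = (L.filter g).map v := by
  intro L
  induction L with
  | nil => intro _; rfl
  | cons x xs ih =>
    intro hp
    have hx := hp x List.mem_cons_self
    have hxs := fun i hi => hp i (List.mem_cons_of_mem x hi)
    cases hgx : g x with
    | true =>
      have hfx : f x = some (l, v x) := hx.1 hgx
      rw [List.filterMap_cons_some hfx, List.filter_cons_of_pos (by simp),
        List.filter_cons_of_pos hgx, List.map_cons, List.map_cons, ih hxs]
    | false =>
      cases hfx : f x with
      | none =>
        rw [List.filterMap_cons_none hfx, List.filter_cons_of_neg (by simp [hgx])]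
        exact ih hxs
      | some e =>
        have hne := hx.2 hgx e hfx
        rw [List.filterMap_cons_some hfx, List.filter_cons_of_neg (by simp [hne]),
          List.filter_cons_of_neg (by simp [hgx])]
        exact ih hxs

theorem pvLab_eq_labAt (grid : List (List Int)) (h w : Int) (labF : List Int) (hw : 0 < w)
    (hg : pvGoodLab grid h w labF) (hfix : pvPass grid h w (h * w) labF = labF)
    {p : Int × Int} (hpin : pvInb h w p) {i : Int} (hi0 : 0 ≤ i) (hi1 : i < h * w)
    (hR : pvR grid h w p (pvPairOf w i)) :
    pvLab labF i = pvLabAt w labF p := by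
  have hps := pvSIdx_bounds hpin
  have hkn : (p.1 * w + p.2).toNat < (h * w).toNat := by omega
  have hin : i.toNat < (h * w).toNat := by omega
  have hcastp : (((p.1 * w + p.2).toNat : Nat) : Int) = p.1 * w + p.2 :=
    Int.toNat_of_nonneg hps.1
  have hcasti : ((i.toNat : Nat) : Int) = i := Int.toNat_of_nonneg hi0
  have hR' : pvR grid h w (pvPairOf w (((p.1 * w + p.2).toNat : Nat) : Int))
      (pvPairOf w ((i.toNat : Nat) : Int)) := by
    rw [hcastp, hcasti, pvPairOf_sIdx hw hpin]
    exact hR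
  have := (pvLabel_iff hw hg hfix (p.1 * w + p.2).toNat i.toNat hkn hin).mpr hR'
  rw [pvLab_toNat labF i hi0]
  unfold pvLabAt
  omega

theorem pvVals_eq (grid : List (List Int)) (h w : Int) (labF : List Int)
    (hh : 0 ≤ h) (hw : 0 < w) (hg : pvGoodLab grid h w labF)
    (hfix : pvPass grid h w (h * w) labF = labF) (p : Int × Int)
    (hrep : pvRepP grid h w p) :
    ((pvPairsL grid w labF (h * w)).filter
      (fun e => e.1 == pvLabAt w labF p)).map (·.2) = pvClass grid h w p := by
  unfold pvPairsL
  rw [pvFilterMap_aux _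
    (fun i => @decide _ (Classical.propDecidable (pvR grid h w p (pvPairOf w i))))
    (pvPairOf w) _ _ ?_]
  · unfold pvClass
    rw [pvScanL_eq_map hh hw.le, List.filter_map]
    rfl
  · intro i hi
    rw [PySem.List.mem_pyRange_one] at hi
    constructor
    · intro hgi
      have hR : pvR grid h w p (pvPairOf w i) :=
        of_decide_eq_true (inst := Classical.propDecidable _) hgi
      have hcol : pvColAt grid w i = pvCell grid p.1 p.2 := by
        rw [pvColAt_pair]
        exact pvR_colour grid h w hR
      rw [if_neg (by rw [hcol]; exact hrep.2.1)]
      rw [pvLab_eq_labAt grid h w labF hw hg hfix hrep.1 hi.1 hi.2 hR]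
    · intro hgi e hfe
      by_cases hbg : pvColAt grid w i = pvBg grid
      · rw [if_pos hbg] at hfe; cases hfe
      · rw [if_neg hbg] at hfe
        cases hfe
        intro heq
        -- equal labels would mean i is in p's component
        have hps := pvSIdx_bounds hrep.1
        have hkn : (p.1 * w + p.2).toNat < (h * w).toNat := by omega
        have hin : i.toNat < (h * w).toNat := by omega
        have hlab : labF.getD i.toNat 0 = labF.getD ((p.1 * w + p.2).toNat) 0 := by
          rw [← pvLab_toNat labF i hi.1]
          exact heq
        have hR := (pvLabel_iff hw hg hfix i.toNat ((p.1 * w + p.2).toNat) hin hkn).mp hlab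
        have hcastp : (((p.1 * w + p.2).toNat : Nat) : Int) = p.1 * w + p.2 :=
          Int.toNat_of_nonneg hps.1
        have hcasti : ((i.toNat : Nat) : Int) = i := Int.toNat_of_nonneg hi.1
        rw [hcasti, hcastp, pvPairOf_sIdx hw hrep.1] at hR
        have : (fun i => @decide _ (Classical.propDecidable (pvR grid h w p (pvPairOf w i)))) i = true :=
          decide_eq_true (inst := Classical.propDecidable _) (pvR_symm grid h w hR)
        rw [hgi] at this
        cases this

theorem pvB_cbc (grid : List (List Int)) (h w : Int) (hh : 0 ≤ h) (hw : 0 < w) :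
    (((PySem.List.pyRange 0 (h * w) 1).foldl
        (fun (g : PySem.Dict Int (List (Int × Int))) i =>
          if pvColAt grid w i = pvBg grid then g
          else g.modify (pvLab (pvLabels grid h w (h * w)) i) []
            (· ++ [(PySem.Int.floordiv i w, PySem.Int.mod i w)]))
        PySem.Dict.empty).items).foldl
      (fun (d : PySem.Dict Int (List (List (Int × Int)))) e =>
        d.modify (pvColAt grid w e.1) [] (· ++ [e.2])) PySem.Dict.empty = pvCanon grid h w := by
  obtain ⟨hg, hfix⟩ := pvLabels_spec grid h w hw
  have hnn : 0 ≤ h * w := by positivity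
  have hcast : (((h * w).toNat : Nat) : Int) = h * w := Int.toNat_of_nonneg hnn
  -- step 1: the guarded fold is a fold over the filtered pair list
  have hgroups : ((PySem.List.pyRange 0 (h * w) 1).foldl
      (fun (g : PySem.Dict Int (List (Int × Int))) i =>
        if pvColAt grid w i = pvBg grid then g
        else g.modify (pvLab (pvLabels grid h w (h * w)) i) []
          (· ++ [(PySem.Int.floordiv i w, PySem.Int.mod i w)]))
      PySem.Dict.empty) =
      (pvPairsL grid w (pvLabels grid h w (h * w)) (h * w)).foldl
        (fun (g : PySem.Dict Int (List (Int × Int))) e =>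
          g.modify e.1 [] (· ++ [e.2])) PySem.Dict.empty := by
    unfold pvPairsL
    rw [List.foldl_filterMap]
    apply PySem.List.foldl_congr_mem
    intro acc x _
    by_cases hc : pvColAt grid w x = pvBg grid
    · simp [hc]
    · simp [hc, pvPairOf]
  rw [hgroups]
  -- step 2: keys, nodup, getD, items of the groups dict
  set labF := pvLabels grid h w (h * w) with hlabF
  set P := pvPairsL grid w labF (h * w) with hP
  have hkeys : (P.foldl (fun (g : PySem.Dict Int (List (Int × Int))) e =>
      g.modify e.1 [] (· ++ [e.2])) PySem.Dict.empty).keys =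
      PySem.Set.ofList (P.map (·.1)) := by
    rw [PySem.Dict.keys_foldl_modify_key P (fun e => e.1) []
      (fun _ e => (· ++ [e.2])) PySem.Dict.empty, PySem.Dict.keys_empty,
      PySem.Set.update_nil_left]
  have hnodup : (P.foldl (fun (g : PySem.Dict Int (List (Int × Int))) e =>
      g.modify e.1 [] (· ++ [e.2])) PySem.Dict.empty).keys.Nodup := by
    rw [hkeys]
    exact PySem.Set.nodup_ofList _
  have hgetD : ∀ c : Int, (P.foldl (fun (g : PySem.Dict Int (List (Int × Int))) e =>
      g.modify e.1 [] (· ++ [e.2])) PySem.Dict.empty).getD c [] =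
      (P.filter (fun e => e.1 == c)).map (·.2) := by
    intro c
    rw [PySem.Dict.getD_foldl_modify_append P PySem.Dict.empty c]
    rw [PySem.Dict.getD_empty]
    rfl
  have hkeyseq : PySem.Set.ofList (P.map (·.1)) =
      (pvReps grid h w).map (pvLabAt w labF) := by
    have := pvKeys_prefix grid h w labF hw hg hfix (h * w).toNat (by omega)
    rw [hcast] at this
    rw [hP, this, pvReps_eq_pre grid h w hh hw.le]
  have hitems : (P.foldl (fun (g : PySem.Dict Int (List (Int × Int))) e =>
      g.modify e.1 [] (· ++ [e.2])) PySem.Dict.empty).items =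
      (pvReps grid h w).map (fun p => (pvLabAt w labF p, pvClass grid h w p)) := by
    rw [PySem.Dict.items_eq_map_keys _ hnodup [], hkeys, hkeyseq, List.map_map]
    apply List.map_congr_left
    intro p hp
    have hrep : pvRepP grid h w p := pvMem_reps.mp hp
    simp only [Function.comp]
    rw [hgetD]
    rw [pvVals_eq grid h w labF hh hw hg hfix p hrep]
  rw [hitems]
  -- step 3: fold over the reps
  unfold pvCanon
  rw [List.foldl_map]
  apply PySem.List.foldl_congr_mem
  intro acc p hp
  have hrep : pvRepP grid h w p := pvMem_reps.mp hp
  have hcol : pvColAt grid w (pvLabAt w labF p) = pvCell grid p.1 p.2 := by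
    have hps := pvSIdx_bounds hrep.1
    have hkn : (p.1 * w + p.2).toNat < (h * w).toNat := by omega
    obtain ⟨m, hm, hv, hR⟩ := hg.2 ((p.1 * w + p.2).toNat) hkn
    have hlv : pvLabAt w labF p = (m : Int) := by
      unfold pvLabAt
      exact hv
    rw [hlv, pvColAt_pair]
    have hcastp : (((p.1 * w + p.2).toNat : Nat) : Int) = p.1 * w + p.2 :=
      Int.toNat_of_nonneg hps.1
    have hR' : pvR grid h w p (pvPairOf w (m : Int)) := by
      rw [← pvPairOf_sIdx hw hrep.1, ← hcastp]
      exact hR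
    exact pvR_colour grid h w hR'
  rw [hcol]

-- ---------- A-side: the visited matrix ----------

def pvShape (h w : Int) (vis : List (List Bool)) : Prop :=
  vis.length = h.toNat ∧ ∀ k : Nat, k < h.toNat → (vis.getD k []).length = w.toNat

theorem pvVis_eq_getD (vis : List (List Bool)) (r c : Int) (h0 : 0 ≤ r) (h1 : 0 ≤ c) :
    pvVis vis r c = ((vis.getD r.toNat []).getD c.toNat false) := by
  unfold pvVis
  rw [PySem.List.pyGetD_of_nonneg _ _ h0, PySem.List.pyGetD_of_nonneg _ _ h1]

theorem pvMark_eq (vis : List (List Bool)) (r c : Int) (h0 : 0 ≤ r) (h1 : 0 ≤ c) :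
    pvMark vis r c = vis.set r.toNat ((vis.getD r.toNat []).set c.toNat true) := by
  unfold pvMark
  rw [PySem.List.pyGetD_of_nonneg _ _ h0, PySem.List.pySetD_of_nonneg _ _ h1,
    PySem.List.pySetD_of_nonneg _ _ h0]

theorem pvShape_mark {h w : Int} {vis : List (List Bool)} (hs : pvShape h w vis)
    {p : Int × Int} (hp : pvInb h w p) : pvShape h w (pvMark vis p.1 p.2) := by
  obtain ⟨hin1, hin2, hin3, hin4⟩ := hp
  rw [pvMark_eq vis p.1 p.2 hin1 hin3]
  constructor
  · rw [List.length_set]; exact hs.1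
  · intro k hk
    by_cases hkr : p.1.toNat = k
    · subst hkr
      rw [pvGetDset_self _ _ _ _ (by rw [hs.1]; omega), List.length_set]
      exact hs.2 _ hk
    · rw [pvGetDset_ne _ _ _ _ _ hkr]
      exact hs.2 _ hk

theorem pvVis_mark_self {h w : Int} {vis : List (List Bool)} (hs : pvShape h w vis)
    {p : Int × Int} (hp : pvInb h w p) : pvVis (pvMark vis p.1 p.2) p.1 p.2 = true := by
  obtain ⟨hin1, hin2, hin3, hin4⟩ := hp
  rw [pvVis_eq_getD _ _ _ hin1 hin3, pvMark_eq vis p.1 p.2 hin1 hin3,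
    pvGetDset_self _ _ _ _ (by rw [hs.1]; omega),
    pvGetDset_self _ _ _ _ (by rw [hs.2 p.1.toNat (by omega)]; omega)]

theorem pvVis_mark_other {h w : Int} {vis : List (List Bool)} (hs : pvShape h w vis)
    {p q : Int × Int} (hp : pvInb h w p) (hq : pvInb h w q) (hne : q ≠ p) :
    pvVis (pvMark vis p.1 p.2) q.1 q.2 = pvVis vis q.1 q.2 := by
  obtain ⟨hp1, hp2, hp3, hp4⟩ := hp
  obtain ⟨hq1, hq2, hq3, hq4⟩ := hq
  rw [pvVis_eq_getD _ _ _ hq1 hq3, pvVis_eq_getD _ _ _ hq1 hq3,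
    pvMark_eq vis p.1 p.2 hp1 hp3]
  by_cases hrr : p.1.toNat = q.1.toNat
  · have hr : q.1 = p.1 := by omega
    have hcc : p.2.toNat ≠ q.2.toNat := by
      intro hcc
      exact hne (Prod.ext (by omega) (by omega))
    rw [hrr, pvGetDset_self _ _ _ _ (by rw [hs.1]; omega), pvGetDset_ne _ _ _ _ _ hcc]
  · rw [pvGetDset_ne _ _ _ _ _ hrr]

theorem pvAdj_cases {grid : List (List Int)} {h w : Int} {p y : Int × Int}
    (hadj : pvAdjacent grid h w p y) :
    y = (p.1 + 1, p.2) ∨ y = (p.1 - 1, p.2) ∨ y = (p.1, p.2 + 1) ∨ y = (p.1, p.2 - 1) := by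
  obtain ⟨_, _, _, hs⟩ := hadj
  rcases hs with ⟨h1, h2 | h2⟩ | ⟨h1, h2 | h2⟩
  · right; right; left; exact Prod.ext h1 h2
  · right; right; right; exact Prod.ext h1 h2
  · left; exact Prod.ext h2 h1
  · right; left; exact Prod.ext h2 h1

-- ---------- A-side: the BFS while-loop ----------

theorem pvSubset_length_le {α : Type} [DecidableEq α] {l₁ l₂ : List α} (h1 : l₁.Nodup)
    (hs : ∀ x ∈ l₁, x ∈ l₂) (h2 : l₂.Nodup) : l₁.length ≤ l₂.length := by
  have := List.Subperm.length_le (List.subperm_of_subset h1 hs)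
  exact this

def pvBfsInv (grid : List (List Int)) (h w : Int) (p₀ : Int × Int)
    (V₀ : (Int × Int) → Prop) (vis : List (List Bool)) (q cells : List (Int × Int)) : Prop :=
  pvShape h w vis ∧
  (∀ x, pvInb h w x → (pvVis vis x.1 x.2 = true ↔ (V₀ x ∨ x ∈ cells))) ∧
  cells.Nodup ∧
  (∀ x ∈ cells, pvR grid h w p₀ x) ∧
  p₀ ∈ cells ∧
  (∀ x ∈ q, x ∈ cells) ∧
  (∀ x ∈ cells, x ∉ q → ∀ y, pvAdjacent grid h w x y → y ∈ cells)

theorem pvBfs_cells_sub {grid : List (List Int)} {h w : Int} {p₀ : Int × Int}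
    (hp₀ : pvInb h w p₀) {cells : List (Int × Int)}
    (hc : ∀ x ∈ cells, pvR grid h w p₀ x) :
    ∀ x ∈ cells, x ∈ pvClass grid h w p₀ := by
  intro x hx
  exact pvMem_class.mpr ⟨pvR_inb grid h w hp₀ (hc x hx), hc x hx⟩

set_option maxHeartbeats 2000000 in
theorem pvBfsStep_spec (grid : List (List Int)) (h w : Int) (p₀ : Int × Int)
    (hp₀ : pvInb h w p₀) (colour : Int) (hcol : colour = pvCell grid p₀.1 p₀.2)
    (V₀ : (Int × Int) → Prop) (hV₀ : ∀ x, pvR grid h w p₀ x → ¬ V₀ x)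
    (cq : Int × Int) (hcq : pvR grid h w p₀ cq) (d : Int × Int)
    (hd : d = ((1 : Int), (0 : Int)) ∨ d = (-1, 0) ∨ d = (0, 1) ∨ d = (0, -1))
    (s : List (List Bool) × List (Int × Int) × List (Int × Int))
    (hinv : pvBfsInv grid h w p₀ V₀ s.1 (cq :: s.2.1) s.2.2) :
    pvBfsInv grid h w p₀ V₀
        (if 0 ≤ cq.1 + d.1 ∧ cq.1 + d.1 < h ∧ 0 ≤ cq.2 + d.2 ∧ cq.2 + d.2 < w ∧
            pvVis s.1 (cq.1 + d.1) (cq.2 + d.2) = false ∧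
            pvCell grid (cq.1 + d.1) (cq.2 + d.2) = colour
          then (pvMark s.1 (cq.1 + d.1) (cq.2 + d.2),
                s.2.1 ++ [(cq.1 + d.1, cq.2 + d.2)], s.2.2 ++ [(cq.1 + d.1, cq.2 + d.2)])
          else s).1
        (cq :: (if 0 ≤ cq.1 + d.1 ∧ cq.1 + d.1 < h ∧ 0 ≤ cq.2 + d.2 ∧ cq.2 + d.2 < w ∧
            pvVis s.1 (cq.1 + d.1) (cq.2 + d.2) = false ∧
            pvCell grid (cq.1 + d.1) (cq.2 + d.2) = colour
          then (pvMark s.1 (cq.1 + d.1) (cq.2 + d.2),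
                s.2.1 ++ [(cq.1 + d.1, cq.2 + d.2)], s.2.2 ++ [(cq.1 + d.1, cq.2 + d.2)])
          else s).2.1)
        (if 0 ≤ cq.1 + d.1 ∧ cq.1 + d.1 < h ∧ 0 ≤ cq.2 + d.2 ∧ cq.2 + d.2 < w ∧
            pvVis s.1 (cq.1 + d.1) (cq.2 + d.2) = false ∧
            pvCell grid (cq.1 + d.1) (cq.2 + d.2) = colour
          then (pvMark s.1 (cq.1 + d.1) (cq.2 + d.2),
                s.2.1 ++ [(cq.1 + d.1, cq.2 + d.2)], s.2.2 ++ [(cq.1 + d.1, cq.2 + d.2)])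
          else s).2.2 ∧
      (∀ x ∈ s.2.2, x ∈ (if 0 ≤ cq.1 + d.1 ∧ cq.1 + d.1 < h ∧ 0 ≤ cq.2 + d.2 ∧
            cq.2 + d.2 < w ∧ pvVis s.1 (cq.1 + d.1) (cq.2 + d.2) = false ∧
            pvCell grid (cq.1 + d.1) (cq.2 + d.2) = colour
          then (pvMark s.1 (cq.1 + d.1) (cq.2 + d.2),
                s.2.1 ++ [(cq.1 + d.1, cq.2 + d.2)], s.2.2 ++ [(cq.1 + d.1, cq.2 + d.2)])
          else s).2.2) ∧
      ((if 0 ≤ cq.1 + d.1 ∧ cq.1 + d.1 < h ∧ 0 ≤ cq.2 + d.2 ∧ cq.2 + d.2 < w ∧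
            pvVis s.1 (cq.1 + d.1) (cq.2 + d.2) = false ∧
            pvCell grid (cq.1 + d.1) (cq.2 + d.2) = colour
          then (pvMark s.1 (cq.1 + d.1) (cq.2 + d.2),
                s.2.1 ++ [(cq.1 + d.1, cq.2 + d.2)], s.2.2 ++ [(cq.1 + d.1, cq.2 + d.2)])
          else s).2.1.length + s.2.2.length = s.2.1.length +
        (if 0 ≤ cq.1 + d.1 ∧ cq.1 + d.1 < h ∧ 0 ≤ cq.2 + d.2 ∧ cq.2 + d.2 < w ∧
            pvVis s.1 (cq.1 + d.1) (cq.2 + d.2) = false ∧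
            pvCell grid (cq.1 + d.1) (cq.2 + d.2) = colour
          then (pvMark s.1 (cq.1 + d.1) (cq.2 + d.2),
                s.2.1 ++ [(cq.1 + d.1, cq.2 + d.2)], s.2.2 ++ [(cq.1 + d.1, cq.2 + d.2)])
          else s).2.2.length) ∧
      (pvAdjacent grid h w cq (cq.1 + d.1, cq.2 + d.2) →
        (cq.1 + d.1, cq.2 + d.2) ∈ (if 0 ≤ cq.1 + d.1 ∧ cq.1 + d.1 < h ∧ 0 ≤ cq.2 + d.2 ∧
            cq.2 + d.2 < w ∧ pvVis s.1 (cq.1 + d.1) (cq.2 + d.2) = false ∧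
            pvCell grid (cq.1 + d.1) (cq.2 + d.2) = colour
          then (pvMark s.1 (cq.1 + d.1) (cq.2 + d.2),
                s.2.1 ++ [(cq.1 + d.1, cq.2 + d.2)], s.2.2 ++ [(cq.1 + d.1, cq.2 + d.2)])
          else s).2.2) := by
  obtain ⟨hsh, hvs, hnd, hR, hp0c, hqc, hcl⟩ := hinv
  have hcqinb : pvInb h w cq := pvR_inb grid h w hp₀ hcq
  have hccol : pvCell grid cq.1 cq.2 = pvCell grid p₀.1 p₀.2 := pvR_colour grid h w hcq
  by_cases hcond : 0 ≤ cq.1 + d.1 ∧ cq.1 + d.1 < h ∧ 0 ≤ cq.2 + d.2 ∧ cq.2 + d.2 < w ∧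
      pvVis s.1 (cq.1 + d.1) (cq.2 + d.2) = false ∧
      pvCell grid (cq.1 + d.1) (cq.2 + d.2) = colour
  · rw [if_pos hcond]
    obtain ⟨hb1, hb2, hb3, hb4, hfresh, hcc⟩ := hcond
    have hyin : pvInb h w ((cq.1 + d.1, cq.2 + d.2) : Int × Int) := ⟨hb1, hb2, hb3, hb4⟩
    have hadj : pvAdjacent grid h w cq (cq.1 + d.1, cq.2 + d.2) := by
      refine ⟨hcqinb, hyin, by rw [← hccol] at hcol; rw [show ((cq.1 + d.1, cq.2 + d.2) :
        Int × Int).1 = cq.1 + d.1 from rfl, show ((cq.1 + d.1, cq.2 + d.2) :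
        Int × Int).2 = cq.2 + d.2 from rfl, hcc, hcol], ?_⟩
      rcases hd with rfl | rfl | rfl | rfl
      · exact Or.inr ⟨by simp <;> omega, Or.inl (by simp <;> omega)⟩
      · exact Or.inr ⟨by simp <;> omega, Or.inr (by simp <;> omega)⟩
      · exact Or.inl ⟨by simp <;> omega, Or.inl (by simp <;> omega)⟩
      · exact Or.inl ⟨by simp <;> omega, Or.inr (by simp <;> omega)⟩
    have hRy : pvR grid h w p₀ (cq.1 + d.1, cq.2 + d.2) := hcq.tail hadj
    have hynotc : (cq.1 + d.1, cq.2 + d.2) ∉ s.2.2 := by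
      intro hyc
      have := (hvs _ hyin).mpr (Or.inr hyc)
      rw [this] at hfresh
      cases hfresh
    refine ⟨⟨pvShape_mark hsh hyin, ?_, ?_, ?_, ?_, ?_, ?_⟩, ?_, ?_, ?_⟩
    · intro x hx
      by_cases hxy : x = (cq.1 + d.1, cq.2 + d.2)
      · subst hxy
        constructor
        · intro _; exact Or.inr (by simp)
        · intro _
          exact pvVis_mark_self hsh hyin
      · rw [show (cq.1 + d.1) = ((cq.1 + d.1, cq.2 + d.2) : Int × Int).1 from rfl,
          show (cq.2 + d.2) = ((cq.1 + d.1, cq.2 + d.2) : Int × Int).2 from rfl,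
          pvVis_mark_other hsh hyin hx hxy]
        rw [hvs x hx]
        constructor
        · rintro (hv | hv)
          · exact Or.inl hv
          · exact Or.inr (by simp [hv])
        · rintro (hv | hv)
          · exact Or.inl hv
          · rcases List.mem_append.mp hv with hv' | hv'
            · exact Or.inr hv'
            · simp at hv'
              exact absurd hv' hxy
    · exact List.Nodup.append hnd (List.nodup_singleton _)
        (by simp [List.disjoint_singleton]; exact hynotc)
    · intro x hx
      rcases List.mem_append.mp hx with hx' | hx'
      · exact hR x hx'
      · simp at hx'
        subst hx'
        exact hRy
    · exact List.mem_append_left _ hp0c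
    · intro x hx
      rcases List.mem_cons.mp hx with rfl | hx'
      · exact List.mem_append_left _ (hqc x List.mem_cons_self)
      · rcases List.mem_append.mp hx' with hx'' | hx''
        · exact List.mem_append_left _ (hqc x (List.mem_cons_of_mem _ hx''))
        · exact List.mem_append_right _ hx''
    · intro x hx hxq z hz
      rcases List.mem_append.mp hx with hx' | hx'
      · refine List.mem_append_left _ (hcl x hx' ?_ z hz)
        intro hxcq
        rcases List.mem_cons.mp hxcq with rfl | hxq'
        · exact hxq List.mem_cons_self
        · exact hxq (List.mem_cons_of_mem _ (List.mem_append_left _ hxq'))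
      · simp at hx'
        subst hx'
        exact absurd (List.mem_cons_of_mem _ (List.mem_append_right _ (by simp))) hxq
    · intro x hx; exact List.mem_append_left _ hx
    · simp
      omega
    · intro _
      exact List.mem_append_right _ (by simp)
  · rw [if_neg hcond]
    refine ⟨⟨hsh, hvs, hnd, hR, hp0c, hqc, hcl⟩, fun x hx => hx, by simp, ?_⟩
    intro hadj
    have hyin : pvInb h w ((cq.1 + d.1, cq.2 + d.2) : Int × Int) := hadj.2.1
    have hycol : pvCell grid (cq.1 + d.1) (cq.2 + d.2) = colour := by
      have := hadj.2.2.1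
      rw [show ((cq.1 + d.1, cq.2 + d.2) : Int × Int).1 = cq.1 + d.1 from rfl,
        show ((cq.1 + d.1, cq.2 + d.2) : Int × Int).2 = cq.2 + d.2 from rfl] at this
      rw [this, hccol, hcol]
    have hRy : pvR grid h w p₀ (cq.1 + d.1, cq.2 + d.2) := hcq.tail hadj
    have hvis : pvVis s.1 (cq.1 + d.1) (cq.2 + d.2) = true := by
      rcases Bool.eq_false_or_eq_true (pvVis s.1 (cq.1 + d.1) (cq.2 + d.2)) with ht | hf
      · exact ht
      · exact absurd ⟨hyin.1, hyin.2.1, hyin.2.2.1, hyin.2.2.2, hf, hycol⟩ hcond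
    rcases (hvs _ hyin).mp hvis with hv | hv
    · exact absurd hv (hV₀ _ hRy)
    · exact hv

theorem pvBfsFold_spec (grid : List (List Int)) (h w : Int) (p₀ : Int × Int)
    (hp₀ : pvInb h w p₀) (colour : Int) (hcol : colour = pvCell grid p₀.1 p₀.2)
    (V₀ : (Int × Int) → Prop) (hV₀ : ∀ x, pvR grid h w p₀ x → ¬ V₀ x)
    (cq : Int × Int) (hcq : pvR grid h w p₀ cq) :
    ∀ (D : List (Int × Int)), (∀ d ∈ D, d = ((1 : Int), (0 : Int)) ∨ d = (-1, 0) ∨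
      d = (0, 1) ∨ d = (0, -1)) →
    ∀ (s : List (List Bool) × List (Int × Int) × List (Int × Int)),
      pvBfsInv grid h w p₀ V₀ s.1 (cq :: s.2.1) s.2.2 →
      pvBfsInv grid h w p₀ V₀
          (D.foldl (fun s d =>
            if 0 ≤ cq.1 + d.1 ∧ cq.1 + d.1 < h ∧ 0 ≤ cq.2 + d.2 ∧ cq.2 + d.2 < w ∧
                pvVis s.1 (cq.1 + d.1) (cq.2 + d.2) = false ∧
                pvCell grid (cq.1 + d.1) (cq.2 + d.2) = colour
            then (pvMark s.1 (cq.1 + d.1) (cq.2 + d.2),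
                  s.2.1 ++ [(cq.1 + d.1, cq.2 + d.2)], s.2.2 ++ [(cq.1 + d.1, cq.2 + d.2)])
            else s) s).1
          (cq :: (D.foldl (fun s d =>
            if 0 ≤ cq.1 + d.1 ∧ cq.1 + d.1 < h ∧ 0 ≤ cq.2 + d.2 ∧ cq.2 + d.2 < w ∧
                pvVis s.1 (cq.1 + d.1) (cq.2 + d.2) = false ∧
                pvCell grid (cq.1 + d.1) (cq.2 + d.2) = colour
            then (pvMark s.1 (cq.1 + d.1) (cq.2 + d.2),
                  s.2.1 ++ [(cq.1 + d.1, cq.2 + d.2)], s.2.2 ++ [(cq.1 + d.1, cq.2 + d.2)])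
            else s) s).2.1)
          (D.foldl (fun s d =>
            if 0 ≤ cq.1 + d.1 ∧ cq.1 + d.1 < h ∧ 0 ≤ cq.2 + d.2 ∧ cq.2 + d.2 < w ∧
                pvVis s.1 (cq.1 + d.1) (cq.2 + d.2) = false ∧
                pvCell grid (cq.1 + d.1) (cq.2 + d.2) = colour
            then (pvMark s.1 (cq.1 + d.1) (cq.2 + d.2),
                  s.2.1 ++ [(cq.1 + d.1, cq.2 + d.2)], s.2.2 ++ [(cq.1 + d.1, cq.2 + d.2)])
            else s) s).2.2 ∧
      (∀ x ∈ s.2.2, x ∈ (D.foldl (fun s d =>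
            if 0 ≤ cq.1 + d.1 ∧ cq.1 + d.1 < h ∧ 0 ≤ cq.2 + d.2 ∧ cq.2 + d.2 < w ∧
                pvVis s.1 (cq.1 + d.1) (cq.2 + d.2) = false ∧
                pvCell grid (cq.1 + d.1) (cq.2 + d.2) = colour
            then (pvMark s.1 (cq.1 + d.1) (cq.2 + d.2),
                  s.2.1 ++ [(cq.1 + d.1, cq.2 + d.2)], s.2.2 ++ [(cq.1 + d.1, cq.2 + d.2)])
            else s) s).2.2) ∧
      ((D.foldl (fun s d =>
            if 0 ≤ cq.1 + d.1 ∧ cq.1 + d.1 < h ∧ 0 ≤ cq.2 + d.2 ∧ cq.2 + d.2 < w ∧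
                pvVis s.1 (cq.1 + d.1) (cq.2 + d.2) = false ∧
                pvCell grid (cq.1 + d.1) (cq.2 + d.2) = colour
            then (pvMark s.1 (cq.1 + d.1) (cq.2 + d.2),
                  s.2.1 ++ [(cq.1 + d.1, cq.2 + d.2)], s.2.2 ++ [(cq.1 + d.1, cq.2 + d.2)])
            else s) s).2.1.length + s.2.2.length = s.2.1.length + (D.foldl (fun s d =>
            if 0 ≤ cq.1 + d.1 ∧ cq.1 + d.1 < h ∧ 0 ≤ cq.2 + d.2 ∧ cq.2 + d.2 < w ∧
                pvVis s.1 (cq.1 + d.1) (cq.2 + d.2) = false ∧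
                pvCell grid (cq.1 + d.1) (cq.2 + d.2) = colour
            then (pvMark s.1 (cq.1 + d.1) (cq.2 + d.2),
                  s.2.1 ++ [(cq.1 + d.1, cq.2 + d.2)], s.2.2 ++ [(cq.1 + d.1, cq.2 + d.2)])
            else s) s).2.2.length) ∧
      (∀ d ∈ D, pvAdjacent grid h w cq (cq.1 + d.1, cq.2 + d.2) →
        (cq.1 + d.1, cq.2 + d.2) ∈ (D.foldl (fun s d =>
            if 0 ≤ cq.1 + d.1 ∧ cq.1 + d.1 < h ∧ 0 ≤ cq.2 + d.2 ∧ cq.2 + d.2 < w ∧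
                pvVis s.1 (cq.1 + d.1) (cq.2 + d.2) = false ∧
                pvCell grid (cq.1 + d.1) (cq.2 + d.2) = colour
            then (pvMark s.1 (cq.1 + d.1) (cq.2 + d.2),
                  s.2.1 ++ [(cq.1 + d.1, cq.2 + d.2)], s.2.2 ++ [(cq.1 + d.1, cq.2 + d.2)])
            else s) s).2.2) := by
  intro D
  induction D with
  | nil =>
    intro _ s hinv
    exact ⟨hinv, fun x hx => hx, by simp, by simp⟩
  | cons d D' ih =>
    intro hD s hinv
    have hstep := pvBfsStep_spec grid h w p₀ hp₀ colour hcol V₀ hV₀ cq hcq d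
      (hD d List.mem_cons_self) s hinv
    obtain ⟨hinv', hmono', hlen', hcov'⟩ := hstep
    simp only [List.foldl_cons]
    have hres := ih (fun d' hd' => hD d' (List.mem_cons_of_mem _ hd')) _ hinv'
    obtain ⟨hinv'', hmono'', hlen'', hcov''⟩ := hres
    refine ⟨hinv'', fun x hx => hmono'' x (hmono' x hx), by omega, ?_⟩
    intro d' hd' hadj
    rcases List.mem_cons.mp hd' with rfl | hd''
    · exact hmono'' _ (hcov' hadj)
    · exact hcov'' d' hd'' hadj

theorem pvBfs_spec (grid : List (List Int)) (h w : Int) (hh : 0 ≤ h) (hw : 0 ≤ w)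
    (p₀ : Int × Int) (hp₀ : pvInb h w p₀) (colour : Int)
    (hcol : colour = pvCell grid p₀.1 p₀.2)
    (V₀ : (Int × Int) → Prop) (hV₀ : ∀ x, pvR grid h w p₀ x → ¬ V₀ x) :
    ∀ (fuel : Nat) (q cells : List (Int × Int)) (vis : List (List Bool)),
      pvBfsInv grid h w p₀ V₀ vis q cells →
      q.length + 2 * (pvClass grid h w p₀).length < fuel + 2 * cells.length →
      pvShape h w (pvBfs grid h w colour fuel q vis cells).1 ∧
        (pvBfs grid h w colour fuel q vis cells).2.Nodup ∧
        (∀ x, x ∈ (pvBfs grid h w colour fuel q vis cells).2 ↔ pvR grid h w p₀ x) ∧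
        (∀ x, pvInb h w x → (pvVis (pvBfs grid h w colour fuel q vis cells).1 x.1 x.2 = true ↔
          (V₀ x ∨ x ∈ (pvBfs grid h w colour fuel q vis cells).2))) := by
  intro fuel
  induction fuel with
  | zero =>
    intro q cells vis hinv hfuel
    obtain ⟨hsh, hvs, hnd, hR, hp0c, hqc, hcl⟩ := hinv
    have hsub : cells.length ≤ (pvClass grid h w p₀).length :=
      pvSubset_length_le hnd (pvBfs_cells_sub hp₀ hR) (pvNodup_class grid h w p₀ hh hw)
    omega
  | succ fuel ih =>
    intro q cells vis hinv hfuel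
    cases q with
    | nil =>
      simp only [pvBfs]
      obtain ⟨hsh, hvs, hnd, hR, hp0c, hqc, hcl⟩ := hinv
      refine ⟨hsh, hnd, ?_, hvs⟩
      intro x
      constructor
      · exact hR x
      · intro hr
        induction hr with
        | refl => exact hp0c
        | tail hseg hstep ihx =>
          exact hcl _ ihx (by simp) _ hstep
    | cons cq q' =>
      simp only [pvBfs]
      have hcq : pvR grid h w p₀ cq := hinv.2.2.2.1 cq (hinv.2.2.2.2.2.1 cq List.mem_cons_self)
      have hfold := pvBfsFold_spec grid h w p₀ hp₀ colour hcol V₀ hV₀ cq hcq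
        [((1 : Int), (0 : Int)), (-1, 0), (0, 1), (0, -1)] (by
          intro d hd
          fin_cases hd <;> simp)
        (vis, q', cells) hinv
      obtain ⟨hinv', hmono', hlen', hcov'⟩ := hfold
      apply ih
      · -- the invariant with cq dropped from the queue
        obtain ⟨hsh', hvs', hnd', hR', hp0c', hqc', hcl'⟩ := hinv'
        refine ⟨hsh', hvs', hnd', hR', hp0c', ?_, ?_⟩
        · intro x hx
          exact hqc' x (List.mem_cons_of_mem _ hx)
        · intro x hx hxq y hy
          by_cases hxcq : x = cq
          · subst hxcq
            have hc1 := hcov' (1, 0) List.mem_cons_self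
            have hc2 := hcov' (-1, 0) (List.mem_cons_of_mem _ List.mem_cons_self)
            have hc3 := hcov' (0, 1)
              (List.mem_cons_of_mem _ (List.mem_cons_of_mem _ List.mem_cons_self))
            have hc4 := hcov' (0, -1) (List.mem_cons_of_mem _
              (List.mem_cons_of_mem _ (List.mem_cons_of_mem _ List.mem_cons_self)))
            simp only [Prod.fst, Prod.snd, add_zero] at hc1 hc2 hc3 hc4
            rcases pvAdj_cases hy with rfl | rfl | rfl | rfl
            · exact hc1 hy
            · exact hc2 (by simpa using hy)
            · exact hc3 hy
            · exact hc4 (by simpa using hy)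
          · refine hcl' x hx ?_ y hy
            intro hmem
            rcases List.mem_cons.mp hmem with rfl | hmem'
            · exact hxcq rfl
            · exact hxq hmem'
      · simp only [List.length_cons] at hfuel
        simp only [Prod.fst, Prod.snd] at hlen'
        have hsub2 := pvSubset_length_le hinv.2.2.1 hmono' hinv'.2.2.1
        omega

-- ---------- A-side: the scan over the grid ----------

noncomputable def pvCanonPre (grid : List (List Int)) (h w : Int) (P : List (Int × Int)) :
    PySem.Dict Int (List (List (Int × Int))) :=
  (P.filter (fun p => @decide _ (Classical.propDecidable (pvRepP grid h w p)))).foldl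
    (fun d p => d.modify (pvCell grid p.1 p.2) [] (· ++ [pvClass grid h w p]))
    PySem.Dict.empty

theorem pvCanonPre_scan (grid : List (List Int)) (h w : Int) :
    pvCanonPre grid h w (pvScanL h w) = pvCanon grid h w := rfl

theorem pvForall₂_append {α β : Type} {R : α → β → Prop} {l1 l3 : List α} {l2 l4 : List β}
    (h1 : List.Forall₂ R l1 l2) (h2 : List.Forall₂ R l3 l4) :
    List.Forall₂ R (l1 ++ l3) (l2 ++ l4) := by
  induction h1 with
  | nil => exact h2
  | cons h t ih => exact List.Forall₂.cons h ih

theorem pvDictRel_modify {d c : PySem.Dict Int (List (List (Int × Int)))}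
    (hrel : pvDictRel d c) (k : Int) {v v' : List (Int × Int)} (hp : v.Perm v') :
    pvDictRel (d.modify k [] (· ++ [v])) (c.modify k [] (· ++ [v'])) := by
  obtain ⟨hkeys, hnd, hvals⟩ := hrel
  have hcont : d.contains k = c.contains k := by
    rw [PySem.Dict.contains_eq_decide_mem_keys, PySem.Dict.contains_eq_decide_mem_keys, hkeys]
  refine ⟨?_, ?_, ?_⟩
  · rw [PySem.Dict.keys_modify, PySem.Dict.keys_modify]
    cases hc : d.contains k with
    | true =>
      rw [PySem.Dict.keys_insert_of_contains _ _ hc,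
        PySem.Dict.keys_insert_of_contains _ _ (hcont ▸ hc), hkeys]
    | false =>
      rw [PySem.Dict.keys_insert_of_not_contains _ _ hc,
        PySem.Dict.keys_insert_of_not_contains _ _ (hcont ▸ hc), hkeys]
  · rw [PySem.Dict.keys_modify]
    cases hc : d.contains k with
    | true => rw [PySem.Dict.keys_insert_of_contains _ _ hc]; exact hnd
    | false =>
      rw [PySem.Dict.keys_insert_of_not_contains _ _ hc]
      refine List.Nodup.append hnd (List.nodup_singleton _) ?_
      simp only [List.disjoint_singleton]
      intro hk
      have := (PySem.Dict.contains_iff_mem_keys d k).mpr hk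
      rw [hc] at this
      cases this
  · intro k'
    rw [PySem.Dict.getD_modify, PySem.Dict.getD_modify]
    by_cases hkk : k' = k
    · rw [if_pos hkk, if_pos hkk]
      exact pvForall₂_append (hvals k) (List.forall₂_cons.mpr ⟨hp, List.Forall₂.nil⟩)
    · rw [if_neg hkk, if_neg hkk]
      exact hvals k'

theorem pvScanL_pairwise (h w : Int) (hh : 0 ≤ h) (hw : 0 ≤ w) :
    (pvScanL h w).Pairwise (fun a b => a.1 * w + a.2 < b.1 * w + b.2) := by
  rcases eq_or_lt_of_le hw with rfl | hwpos
  · unfold pvScanL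
    simp only [PySem.List.pyRange_one_eq_nil (le_refl (0 : Int)), List.map_nil]
    rw [List.flatMap_eq_nil_iff.mpr (fun _ _ => rfl)]
    exact List.Pairwise.nil
  · rw [pvScanL_eq_map hh hw]
    rw [List.pairwise_map]
    apply List.Pairwise.imp ?_ (PySem.List.pairwise_lt_pyRange_one 0 (h * w))
    intro a b hab
    rw [pvSIdx_pairOf hwpos, pvSIdx_pairOf hwpos]
    exact hab

theorem pvScan_inv (grid : List (List Int)) (h w : Int) (hh : 0 ≤ h) (hw : 0 ≤ w) :
    ∀ (rest P : List (Int × Int)), pvScanL h w = P ++ rest →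
    ∀ (vis : List (List Bool)) (d : PySem.Dict Int (List (List (Int × Int)))),
      pvShape h w vis →
      (∀ x, pvInb h w x → (pvVis vis x.1 x.2 = true ↔
        (x ∈ P ∨ (pvCell grid x.1 x.2 ≠ pvBg grid ∧ ∃ q ∈ P, pvR grid h w q x)))) →
      pvDictRel d (pvCanonPre grid h w P) →
      pvDictRel (rest.foldl (pvScanStep grid h w (pvBg grid)) (vis, d)).2
        (pvCanonPre grid h w (pvScanL h w)) := by
  intro rest
  induction rest with
  | nil =>
    intro P hscan vis d _ _ hrel
    rw [List.foldl_nil, List.append_nil] at *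
    rw [hscan]
    exact hrel
  | cons p rest' ih =>
    intro P hscan vis d hsh hvs hrel
    have hnodup := pvNodup_scanL h w hh hw
    have hpair := pvScanL_pairwise h w hh hw
    have hpmem : p ∈ pvScanL h w := by rw [hscan]; simp
    have hpin : pvInb h w p := pvMem_scanL.mp hpmem
    have hpnotP : p ∉ P := by
      rw [hscan] at hnodup
      have := List.disjoint_of_nodup_append hnodup
      intro hp
      exact this hp List.mem_cons_self
    have hPlt : ∀ q ∈ P, q.1 * w + q.2 < p.1 * w + p.2 := by
      rw [hscan] at hpair
      intro q hq
      exact (List.pairwise_append.mp hpair).2.2 q hq p List.mem_cons_self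
    have hrestgt : ∀ q ∈ rest', p.1 * w + p.2 < q.1 * w + q.2 := by
      rw [hscan] at hpair
      have := (List.pairwise_append.mp hpair).2.1
      exact (List.pairwise_cons.mp this).1
    have hscan' : pvScanL h w = (P ++ [p]) ++ rest' := by
      rw [hscan, List.append_assoc, List.singleton_append]
    rw [List.foldl_cons]
    -- the scan-order position of any same-component earlier cell is in P
    have hmemP : ∀ q, pvInb h w q → q.1 * w + q.2 < p.1 * w + p.2 → q ∈ P := by
      intro q hqin hqlt
      have hqs : q ∈ pvScanL h w := pvMem_scanL.mpr hqin
      rw [hscan] at hqs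
      rcases List.mem_append.mp hqs with hq | hq
      · exact hq
      · rcases List.mem_cons.mp hq with rfl | hq'
        · omega
        · have := hrestgt q hq'
          omega
    by_cases hvisp : pvVis vis p.1 p.2 = true
    · -- already visited: nothing happens
      have hstep : pvScanStep grid h w (pvBg grid) (vis, d) p = (vis, d) := by
        unfold pvScanStep
        rw [if_pos hvisp]
      rw [hstep]
      have hold := (hvs p hpin).mp hvisp
      have hex : pvCell grid p.1 p.2 ≠ pvBg grid ∧ ∃ q ∈ P, pvR grid h w q p := by
        rcases hold with hp' | hp'
        · exact absurd hp' hpnotP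
        · exact hp'
      obtain ⟨hcolp, q0, hq0P, hq0R⟩ := hex
      have hnotrep : ¬ pvRepP grid h w p := by
        rintro ⟨_, _, hall⟩
        exact hall q0 (pvMem_scanL.mp (by rw [hscan]; exact List.mem_append_left _ hq0P))
          (hPlt q0 hq0P) (pvR_symm grid h w hq0R)
      apply ih (P ++ [p]) hscan' vis d hsh
      · intro x hx
        rw [hvs x hx]
        constructor
        · rintro (hv | ⟨hc, q, hq, hr⟩)
          · exact Or.inl (List.mem_append_left _ hv)
          · exact Or.inr ⟨hc, q, List.mem_append_left _ hq, hr⟩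
        · rintro (hv | ⟨hc, q, hq, hr⟩)
          · rcases List.mem_append.mp hv with hv' | hv'
            · exact Or.inl hv'
            · simp at hv'
              subst hv'
              exact hold
          · rcases List.mem_append.mp hq with hq' | hq'
            · exact Or.inr ⟨hc, q, hq', hr⟩
            · simp at hq'
              subst hq'
              exact Or.inr ⟨hc, q0, hq0P, hq0R.trans hr⟩
      · have : pvCanonPre grid h w (P ++ [p]) = pvCanonPre grid h w P := by
          unfold pvCanonPre
          rw [List.filter_append]
          have : List.filter (fun p => @decide _ (Classical.propDecidable (pvRepP grid h w p)))
              [p] = [] := by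
            simp only [List.filter_cons, List.filter_nil]
            rw [if_neg]
            intro hdec
            exact hnotrep (of_decide_eq_true (inst := Classical.propDecidable _) hdec)
          rw [this, List.append_nil]
        rw [this]
        exact hrel
    · have hvispf : pvVis vis p.1 p.2 = false := by
        rcases Bool.eq_false_or_eq_true (pvVis vis p.1 p.2) with hf | ht
        · exact absurd hf hvisp
        · exact ht
      by_cases hbg : pvCell grid p.1 p.2 = pvBg grid
      · -- fresh background cell: mark it, no component
        have hstep : pvScanStep grid h w (pvBg grid) (vis, d) p =
            (pvMark vis p.1 p.2, d) := by
          unfold pvScanStep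
          rw [if_neg hvisp]
          simp only [if_pos hbg]
        rw [hstep]
        have hnotrep : ¬ pvRepP grid h w p := fun hrep => hrep.2.1 hbg
        apply ih (P ++ [p]) hscan' _ d (pvShape_mark hsh hpin)
        · intro x hx
          by_cases hxp : x = p
          · subst hxp
            rw [pvVis_mark_self hsh hpin]
            constructor
            · intro _
              exact Or.inl (List.mem_append_right _ (by simp))
            · intro _
              rfl
          · rw [pvVis_mark_other hsh hpin hx hxp, hvs x hx]
            constructor
            · rintro (hv | ⟨hc, q, hq, hr⟩)
              · exact Or.inl (List.mem_append_left _ hv)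
              · exact Or.inr ⟨hc, q, List.mem_append_left _ hq, hr⟩
            · rintro (hv | ⟨hc, q, hq, hr⟩)
              · rcases List.mem_append.mp hv with hv' | hv'
                · exact Or.inl hv'
                · simp at hv'
                  exact absurd hv' hxp
              · rcases List.mem_append.mp hq with hq' | hq'
                · exact Or.inr ⟨hc, q, hq', hr⟩
                · simp at hq'
                  subst hq'
                  rcases pvR_eq_or grid h w hr with rfl | ⟨_, _, hceq⟩
                  · exact absurd rfl hxp
                  · rw [hceq, hbg] at hc
                    exact absurd rfl hc
        · have : pvCanonPre grid h w (P ++ [p]) = pvCanonPre grid h w P := by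
            unfold pvCanonPre
            rw [List.filter_append]
            have : List.filter (fun p => @decide _ (Classical.propDecidable (pvRepP grid h w p)))
                [p] = [] := by
              simp only [List.filter_cons, List.filter_nil]
              rw [if_neg]
              intro hdec
              exact hnotrep (of_decide_eq_true (inst := Classical.propDecidable _) hdec)
            rw [this, List.append_nil]
          rw [this]
          exact hrel
      · -- a fresh component: BFS floods it
        have hrep : pvRepP grid h w p := by
          refine ⟨hpin, hbg, ?_⟩
          intro q hqin hqlt hr
          have hqP : q ∈ P := hmemP q hqin hqlt
          have : pvVis vis p.1 p.2 = true := (hvs p hpin).mpr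
            (Or.inr ⟨hbg, q, hqP, pvR_symm grid h w hr⟩)
          exact absurd this hvisp
        have hV₀ : ∀ x, pvR grid h w p x →
            ¬ (x ∈ P ∨ (pvCell grid x.1 x.2 ≠ pvBg grid ∧ ∃ q ∈ P, pvR grid h w q x)) := by
          intro x hr
          rintro (hx | ⟨hc, q, hq, hqr⟩)
          · exact hrep.2.2 x (pvMem_scanL.mp (by rw [hscan]; exact List.mem_append_left _ hx))
              (hPlt x hx) hr
          · have hqp : pvR grid h w q p := hqr.trans (pvR_symm grid h w hr)
            have : pvVis vis p.1 p.2 = true := (hvs p hpin).mpr (Or.inr ⟨hbg, q, hq, hqp⟩)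
            exact absurd this hvisp
        have hinv : pvBfsInv grid h w p
            (fun x => x ∈ P ∨ (pvCell grid x.1 x.2 ≠ pvBg grid ∧ ∃ q ∈ P, pvR grid h w q x))
            (pvMark vis p.1 p.2) [p] [p] := by
          refine ⟨pvShape_mark hsh hpin, ?_, List.nodup_singleton p,
            ?_, by simp, by simp, ?_⟩
          · intro x hx
            by_cases hxp : x = p
            · subst hxp
              rw [pvVis_mark_self hsh hpin]
              constructor
              · intro _
                exact Or.inr (by simp)
              · intro _
                rfl
            · rw [pvVis_mark_other hsh hpin hx hxp, hvs x hx]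
              constructor
              · intro hv
                exact Or.inl hv
              · rintro (hv | hv)
                · exact hv
                · simp at hv
                  exact absurd hv hxp
          · intro x hx
            simp at hx
            subst hx
            exact Relation.ReflTransGen.refl
          · intro x hx hxq
            simp at hx
            exact absurd (show x ∈ [p] by simp [hx]) hxq
        have hLbound : (pvClass grid h w p).length ≤ h.toNat * w.toNat := by
          have h1 : (pvClass grid h w p).length ≤ (pvScanL h w).length :=
            List.length_filter_le _ _
          have h2 : (pvScanL h w).length = (h * w).toNat := by
            rw [pvScanL_eq_map hh hw, List.length_map, PySem.List.length_pyRange_one]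
            simp
          have h3 : h * w = ((h.toNat * w.toNat : Nat) : Int) := by
            push_cast
            rw [Int.toNat_of_nonneg hh, Int.toNat_of_nonneg hw]
          have h4 : (h * w).toNat = h.toNat * w.toNat := by
            rw [h3, Int.toNat_natCast]
          omega
        have hbfs := pvBfs_spec grid h w hh hw p hpin (pvCell grid p.1 p.2) rfl
          (fun x => x ∈ P ∨ (pvCell grid x.1 x.2 ≠ pvBg grid ∧ ∃ q ∈ P, pvR grid h w q x))
          hV₀ (2 * h.toNat * w.toNat + 1) [p] [p] (pvMark vis p.1 p.2) hinv
          (by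
            simp only [List.length_cons, List.length_nil]
            have h5 : 2 * h.toNat * w.toNat = 2 * (h.toNat * w.toNat) := by ring
            omega)
        obtain ⟨hsh', hnd', hmem', hvs'⟩ := hbfs
        have hstep : pvScanStep grid h w (pvBg grid) (vis, d) p =
            ((pvBfs grid h w (pvCell grid p.1 p.2) (2 * h.toNat * w.toNat + 1) [p]
              (pvMark vis p.1 p.2) [p]).1,
             d.modify (pvCell grid p.1 p.2) []
              (· ++ [(pvBfs grid h w (pvCell grid p.1 p.2) (2 * h.toNat * w.toNat + 1) [p]
                (pvMark vis p.1 p.2) [p]).2])) := by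
          unfold pvScanStep
          rw [if_neg hvisp]
          simp only [if_neg hbg]
        rw [hstep]
        apply ih (P ++ [p]) hscan' _ _ hsh'
        · intro x hx
          rw [hvs' x hx]
          constructor
          · rintro ((hv | ⟨hc, q, hq, hr⟩) | hv)
            · exact Or.inl (List.mem_append_left _ hv)
            · exact Or.inr ⟨hc, q, List.mem_append_left _ hq, hr⟩
            · have hr := (hmem' x).mp hv
              by_cases hxp : x = p
              · exact Or.inl (hxp ▸ List.mem_append_right _ (by simp))
              · rcases pvR_eq_or grid h w hr with rfl | ⟨_, _, hceq⟩
                · exact Or.inl (List.mem_append_right _ (by simp))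
                · refine Or.inr ⟨by rw [hceq]; exact hbg, p,
                    List.mem_append_right _ (by simp), hr⟩
          · rintro (hv | ⟨hc, q, hq, hr⟩)
            · rcases List.mem_append.mp hv with hv' | hv'
              · exact Or.inl (Or.inl hv')
              · simp at hv'
                subst hv'
                exact Or.inr ((hmem' x).mpr Relation.ReflTransGen.refl)
            · rcases List.mem_append.mp hq with hq' | hq'
              · exact Or.inl (Or.inr ⟨hc, q, hq', hr⟩)
              · simp at hq'
                subst hq'
                exact Or.inr ((hmem' x).mpr hr)
        · have hcanon : pvCanonPre grid h w (P ++ [p]) =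
              (pvCanonPre grid h w P).modify (pvCell grid p.1 p.2) []
                (· ++ [pvClass grid h w p]) := by
            unfold pvCanonPre
            rw [List.filter_append]
            have : List.filter (fun p => @decide _ (Classical.propDecidable (pvRepP grid h w p)))
                [p] = [p] := by
              simp only [List.filter_cons, List.filter_nil]
              rw [if_pos (decide_eq_true (inst := Classical.propDecidable _) hrep)]
            rw [this, List.foldl_append, List.foldl_cons, List.foldl_nil]
          rw [hcanon]
          apply pvDictRel_modify hrel
          rw [List.perm_ext_iff_of_nodup hnd' (pvNodup_class grid h w p hh hw)]
          intro x
          rw [hmem' x, pvMem_class]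
          constructor
          · intro hr
            exact ⟨pvR_inb grid h w hpin hr, hr⟩
          · rintro ⟨_, hr⟩
            exact hr

-- ---------- putting everything together ----------

theorem pvA_fold_eq (grid : List (List Int)) (h w bg : Int)
    (init : List (List Bool) × PySem.Dict Int (List (List (Int × Int)))) :
    (PySem.List.pyRange 0 h 1).foldl
      (fun st r => (PySem.List.pyRange 0 w 1).foldl
        (fun st c => pvScanStep grid h w bg st (r, c)) st) init =
      (pvScanL h w).foldl (pvScanStep grid h w bg) init := by
  unfold pvScanL
  rw [List.foldl_flatMap]
  simp only [List.foldl_map]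

theorem pvTransform_eq (grid : List (List Int)) : transform grid = transform_alt grid := by
  simp only [transform, transform_alt]
  by_cases hw0 : (grid.headD []).length = 0
  · -- zero-width rows: both component dictionaries are empty
    simp only [hw0, Nat.cast_zero, mul_zero]
    simp only [PySem.List.pyRange_one_eq_nil (le_refl (0 : Int)), List.foldl_nil]
    rw [PySem.List.foldl_ignore]
    rfl
  · have hwpos : (0 : Int) < ((grid.headD []).length : Int) := by
      have := Nat.pos_of_ne_zero hw0
      exact_mod_cast this
    have hh : (0 : Int) ≤ (grid.length : Int) := by positivity
    set h : Int := (grid.length : Int)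
    set w : Int := ((grid.headD []).length : Int)
    rw [pvA_fold_eq]
    have hvis0 : ∀ x : Int × Int, pvInb h w x →
        pvVis (List.replicate h.toNat (List.replicate w.toNat false)) x.1 x.2 = false := by
      intro x hx
      rw [pvVis_eq_getD _ _ _ hx.1 hx.2.2.1]
      have h1 : (List.replicate h.toNat (List.replicate w.toNat false)).getD x.1.toNat [] =
          List.replicate w.toNat false := by
        rw [List.getD_eq_getElem?_getD, List.getElem?_replicate, if_pos (by
          have h2 := hx.1
          have h3 := hx.2.1
          omega)]
        rfl
      rw [h1, List.getD_eq_getElem?_getD, List.getElem?_replicate]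
      split <;> rfl
    have hshape0 : pvShape h w (List.replicate h.toNat (List.replicate w.toNat false)) := by
      constructor
      · simp
      · intro k hk
        rw [List.getD_eq_getElem?_getD, List.getElem?_replicate, if_pos hk]
        simp
    have hvs0 : ∀ x : Int × Int, pvInb h w x →
        (pvVis (List.replicate h.toNat (List.replicate w.toNat false)) x.1 x.2 = true ↔
          (x ∈ ([] : List (Int × Int)) ∨ (pvCell grid x.1 x.2 ≠ pvBg grid ∧
            ∃ q ∈ ([] : List (Int × Int)), pvR grid h w q x))) := by
      intro x hx
      rw [hvis0 x hx]
      simp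
    have hrel0 : pvDictRel PySem.Dict.empty (pvCanonPre grid h w []) := by
      have hempty : pvCanonPre grid h w [] = PySem.Dict.empty := rfl
      rw [hempty]
      refine ⟨rfl, ?_, ?_⟩
      · rw [PySem.Dict.keys_empty]
        exact List.nodup_nil
      · intro k
        rw [PySem.Dict.getD_empty]
        exact List.Forall₂.nil
    have hrel := pvScan_inv grid h w hh hwpos.le (pvScanL h w) [] (by simp)
      (List.replicate h.toNat (List.replicate w.toNat false)) PySem.Dict.empty
      hshape0 hvs0 hrel0
    rw [pvCanonPre_scan] at hrel
    rw [pvB_cbc grid h w hh hwpos]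
    exact pvRender_congr h w (pvBg grid) _ _ hrel

-- ===== VERDICT (by name: the statement is the Claim_ definition above) =====
theorem transform_spec : Claim_equal_transform := by
  unfold Claim_equal_transform Spec_transform
  intro grid _ _
  exact pvTransform_eq grid
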